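-- pv_equiv track=rewrite | github.com/JH-TT/Coding_Practice | Programmers/Implementation_P/250136.py | solution
-- ===== SOURCE A (Python) =====
-- from collections import defaultdict, deque
--
-- def solution(land):
--     answer = 0
--
--     dx = [0, 0, 1, -1]
--     dy = [1, -1, 0, 0]
--
--     r = len(land)
--     c = len(land[0])
--     # 각 좌표별 구역 구분 번호
--     sep_num = [[-1 for _ in range(c)] for _ in range(r)]
--     # 각 구역별 석유량
--     oil = defaultdict(int)
--
--     seq = 1 # 구역 번
--     for i in range(r):
--         for j in range(c):
--             if sep_num[i][j] != -1 or land[i][j] == 0: continue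
--             # 석유면 탐색 시작
--             q = deque()
--             q.append((i, j))
--             sep_num[i][j] = seq
--             cnt = 1
--             while q:
--                 x, y = q.popleft()
--
--                 for h in range(4):
--                     nx = x + dx[h]
--                     ny = y + dy[h]
--                     if nx < 0 or nx >= r or ny < 0 or ny >= c: continue
--                     if land[nx][ny] == 0: continue
--                     if sep_num[nx][ny] != -1: continue
--                     sep_num[nx][ny] = seq
--                     cnt += 1
--                     q.append((nx, ny))
--             oil[seq] = cnt
--             seq += 1
--
--     for i in range(c):
--         visit = [0] * seq
--         all_cnt = 0
--         for j in range(r):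
--             if sep_num[j][i] == -1: continue
--             if visit[sep_num[j][i]] != 0: continue
--             all_cnt += oil[sep_num[j][i]]
--             visit[sep_num[j][i]] = 1
--         answer = max(answer, all_cnt)
--
--     return answer
-- ===== SOURCE B (Python) =====
-- def solution(land):
--     r = len(land)
--     c = len(land[0])
--     n = r * c
--     parent = list(range(n))
--     size = [1] * n
--
--     def find(a):
--         while parent[a] != a:
--             a = parent[a]
--         return a
--
--     def union(a, b):
--         ra, rb = find(a), find(b)
--         if ra == rb:
--             return
--         if size[ra] < size[rb]:
--             ra, rb = rb, ra
--         parent[rb] = ra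
--         size[ra] += size[rb]
--
--     for i in range(r):
--         for j in range(c):
--             if land[i][j] == 0:
--                 continue
--             if j + 1 < c and land[i][j + 1] != 0:
--                 union(i * c + j, i * c + j + 1)
--             if i + 1 < r and land[i + 1][j] != 0:
--                 union(i * c + j, (i + 1) * c + j)
--
--     best = 0
--     for j in range(c):
--         roots = {find(i * c + j) for i in range(r) if land[i][j] != 0}
--         best = max(best, sum(size[rt] for rt in roots))
--     return best
-- ===== Notes on version B (the rewrite author's own statement) =====
-- stated objective: alternative
-- what changed: A labels regions by BFS flood fill (deque) into a region-id grid plus an oil dict and rescans each column with a per-region visit array; B uses a union-find (disjoint-set) over flattened cell indices, uniting each oil cell with its right and down oil neighbours, then per column collects the distinct roots of its oil cells and sums their component sizes.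
import Mathlib
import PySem

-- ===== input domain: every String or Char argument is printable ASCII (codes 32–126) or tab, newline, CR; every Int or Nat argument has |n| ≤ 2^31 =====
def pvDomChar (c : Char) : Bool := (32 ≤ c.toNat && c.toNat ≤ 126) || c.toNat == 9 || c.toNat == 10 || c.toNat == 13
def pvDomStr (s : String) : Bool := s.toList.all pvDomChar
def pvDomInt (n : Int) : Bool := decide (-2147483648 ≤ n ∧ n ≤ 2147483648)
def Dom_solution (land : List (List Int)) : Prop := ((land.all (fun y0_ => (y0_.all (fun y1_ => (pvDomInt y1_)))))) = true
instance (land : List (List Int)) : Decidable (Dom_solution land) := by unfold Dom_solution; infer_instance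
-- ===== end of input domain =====

-- B replaces A's BFS region labelling (region-id grid + oil dict + per-column visit-array rescan)
-- by a union-find over flattened cell indices (union right/down oil neighbours, then per column
-- sum component sizes over the distinct roots); same return value (objective: alternative).

-- land[x][y]; both programs read it only under 0 ≤ x < len(land), 0 ≤ y < len(land[0]) guards,
-- where pyGetD is exact
def landAt (land : List (List Int)) (x y : Int) : Int :=
  PySem.List.pyGetD (PySem.List.pyGetD land x []) y 0

-- ===== PORT A =====
-- the four neighbour offsets (dx[h], dy[h]) for h = 0,1,2,3
def offs : List (Int × Int) := [(0,1), (0,-1), (1,0), (-1,0)]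

-- one step of A's 'for h in range(4)' body (state: sep_num, cnt, queue)
def stepA (land : List (List Int)) (r c seq x y : Int)
    (st : ((Int × Int) → Int) × Int × List (Int × Int)) (d : Int × Int) :
    ((Int × Int) → Int) × Int × List (Int × Int) :=
  if x + d.1 < 0 ∨ r ≤ x + d.1 ∨ y + d.2 < 0 ∨ c ≤ y + d.2 then st
  else if landAt land (x + d.1) (y + d.2) = 0 then st
  else if st.1 (x + d.1, y + d.2) ≠ -1 then st
  else ((fun v => if v = (x + d.1, y + d.2) then seq else st.1 v), st.2.1 + 1,
    st.2.2 ++ [(x + d.1, y + d.2)])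

-- A's BFS while-loop (deque: pop from the FRONT).  The Nat fuel only totalizes the
-- Python 'while q:' loop: every caller passes more fuel than the loop can consume.
def bfsA (land : List (List Int)) (r c seq : Int) :
    Nat → ((Int × Int) → Int) → Int → List (Int × Int) → (((Int × Int) → Int) × Int)
  | 0, sep, cnt, _ => (sep, cnt)
  | _ + 1, sep, cnt, [] => (sep, cnt)
  | fuel + 1, sep, cnt, (x, y) :: q =>
    let st := offs.foldl (stepA land r c seq x y) (sep, cnt, q)
    bfsA land r c seq fuel st.1 st.2.1 st.2.2

-- the body of A's main double loop over cells (i, j) (state: sep_num, oil, seq)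
def cellA (land : List (List Int)) (r c : Int)
    (st : ((Int × Int) → Int) × (Int → Int) × Int) (v : Int × Int) :
    ((Int × Int) → Int) × (Int → Int) × Int :=
  if st.1 v ≠ -1 ∨ landAt land v.1 v.2 = 0 then st
  else
    let res := bfsA land r c st.2.2 (2 * (r.toNat * c.toNat) + 2)
      (fun w => if w = v then st.2.2 else st.1 w) 1 [v]
    (res.1, (fun l => if l = st.2.2 then res.2 else st.2.1 l), st.2.2 + 1)

-- the body of A's second loop, over rows j of column i (state: visit, all_cnt)
def colA (sep : (Int × Int) → Int) (oil : Int → Int) (i : Int)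
    (p : (Int → Int) × Int) (j : Int) : (Int → Int) × Int :=
  if sep (j, i) = -1 then p
  else if p.1 (sep (j, i)) ≠ 0 then p
  else ((fun t => if t = sep (j, i) then 1 else p.1 t), p.2 + oil (sep (j, i)))

def solution (land : List (List Int)) : Int :=
  let r := PySem.List.len land
  let c := PySem.List.len (PySem.List.pyGetD land 0 [])
  -- sep_num (-1 everywhere), oil (defaultdict int), seq = 1
  let st := (PySem.List.pyRange 0 r 1).foldl (fun st i =>
      (PySem.List.pyRange 0 c 1).foldl (fun st j => cellA land r c st (i, j)) st)
    ((fun _ => (-1 : Int)), (fun _ => (0 : Int)), (1 : Int))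
  (PySem.List.pyRange 0 c 1).foldl (fun answer i =>
      max answer ((PySem.List.pyRange 0 r 1).foldl (colA st.1 st.2.1 i)
        ((fun _ => (0 : Int)), (0 : Int))).2)
    0

-- ===== PORT B =====
-- the parent and size arrays of B's union-find are maps on flattened indices i*c+j
-- B's find: 'while parent[a] != a: a = parent[a]'.  The Nat fuel only totalizes the while
-- loop: callers pass n = r*c, enough for any parent forest on the n cell indices.
def findRoot (p : Int → Int) : Nat → Int → Int
  | 0, a => a
  | fuel + 1, a => if p a = a then a else findRoot p fuel (p a)

-- B's union(a, b): union by size, attach the smaller root below the larger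
def ufUnion (n : Nat) (uf : (Int → Int) × (Int → Int)) (a b : Int) :
    (Int → Int) × (Int → Int) :=
  let ra := findRoot uf.1 n a
  let rb := findRoot uf.1 n b
  if ra = rb then uf
  else
    let rr := if uf.2 ra < uf.2 rb then (rb, ra) else (ra, rb)
    ((fun x => if x = rr.2 then rr.1 else uf.1 x),
     fun x => if x = rr.1 then uf.2 rr.1 + uf.2 rr.2 else uf.2 x)

-- the body of B's double scan: unite an oil cell with its right and down oil neighbours
def ufScan (land : List (List Int)) (r c : Int) (n : Nat)
    (uf : (Int → Int) × (Int → Int)) (v : Int × Int) : (Int → Int) × (Int → Int) :=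
  if landAt land v.1 v.2 = 0 then uf
  else
    let uf1 := if v.2 + 1 < c ∧ landAt land v.1 (v.2 + 1) ≠ 0 then
        ufUnion n uf (v.1 * c + v.2) (v.1 * c + v.2 + 1) else uf
    if v.1 + 1 < r ∧ landAt land (v.1 + 1) v.2 ≠ 0 then
      ufUnion n uf1 (v.1 * c + v.2) ((v.1 + 1) * c + v.2) else uf1

-- B's set comprehension '{find(i*c+j) for i in range(r) if land[i][j] != 0}'
def colRootsB (land : List (List Int)) (r c : Int) (n : Nat) (p : Int → Int) (j : Int) :
    PySem.Set Int :=
  (PySem.List.pyRange 0 r 1).foldl (fun s i =>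
    if landAt land i j ≠ 0 then PySem.Set.add s (findRoot p n (i * c + j)) else s)
    PySem.Set.empty

def solution_alt (land : List (List Int)) : Int :=
  let r := PySem.List.len land
  let c := PySem.List.len (PySem.List.pyGetD land 0 [])
  let n := (r * c).toNat
  let uf := (PySem.List.pyRange 0 r 1).foldl (fun uf i =>
      (PySem.List.pyRange 0 c 1).foldl (fun uf j => ufScan land r c n uf (i, j)) uf)
    ((fun x => x), fun _ => (1 : Int))
  -- 'sum(size[rt] for rt in roots)': a sum over the root set, independent of set order
  (PySem.List.pyRange 0 c 1).foldl (fun best j =>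
      max best (((colRootsB land r c n uf.1 j).map (fun rt => uf.2 rt)).sum)) 0

-- ===== PRECONDITION & SPEC =====
-- Pre_ excludes exactly the inputs where the Python raises IndexError: the empty grid
-- (land[0]) and grids with a row shorter than the first row (land[i][j] out of range).
def Pre_solution (land : List (List Int)) : Prop :=
  land ≠ [] ∧ ∀ row ∈ land, (land.headD []).length ≤ row.length
instance (land : List (List Int)) : Decidable (Pre_solution land) := by
  unfold Pre_solution; infer_instance

def pvWitness_solution : List (List Int) := [[1, 0], [0, 1]]

def Spec_solution (land : List (List Int)) (out : Int) : Prop := out = solution_alt land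
instance (land : List (List Int)) (out : Int) : Decidable (Spec_solution land out) := by
  unfold Spec_solution; infer_instance

-- ===== CLAIM (what is proved, stated in full; the proofs are below) =====
def Claim_equal_solution : Prop :=
  ∀ (land : List (List Int)), Dom_solution land → Pre_solution land →
    Spec_solution land (solution land)

-- ===== LEMMAS AND PROOFS =====


-- the grid cells, as a list and a Finset (proof-side only)
def pvGridList (r c : Int) : List (Int × Int) :=
  (PySem.List.pyRange 0 r 1).flatMap (fun i => (PySem.List.pyRange 0 c 1).map (fun j => (i, j)))

def pvGrid (r c : Int) : Finset (Int × Int) := (pvGridList r c).toFinset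

lemma mem_pvGridList (r c : Int) (v : Int × Int) :
    v ∈ pvGridList r c ↔ 0 ≤ v.1 ∧ v.1 < r ∧ 0 ≤ v.2 ∧ v.2 < c := by
  rcases v with ⟨a, b⟩
  simp only [pvGridList, List.mem_flatMap, List.mem_map, PySem.List.mem_pyRange_one]
  constructor
  · rintro ⟨i, hi, j, hj, h⟩
    rw [Prod.mk.injEq] at h
    obtain ⟨rfl, rfl⟩ := h
    exact ⟨hi.1, hi.2, hj.1, hj.2⟩
  · rintro ⟨h1, h2, h3, h4⟩
    exact ⟨a, ⟨h1, h2⟩, b, ⟨h3, h4⟩, rfl⟩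

lemma mem_pvGrid (r c : Int) (v : Int × Int) :
    v ∈ pvGrid r c ↔ 0 ≤ v.1 ∧ v.1 < r ∧ 0 ≤ v.2 ∧ v.2 < c := by
  rw [pvGrid, List.mem_toFinset, mem_pvGridList]

lemma nodup_pvGridList (r c : Int) : (pvGridList r c).Nodup := by
  rw [pvGridList, List.nodup_flatMap]
  constructor
  · intro i _
    exact (PySem.List.nodup_pyRange_one 0 c).map (fun a b h => by
      simpa using congrArg Prod.snd h)
  · refine (PySem.List.nodup_pyRange_one 0 r).imp ?_
    intro i1 i2 hne
    rw [Function.onFun, List.disjoint_left]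
    rintro ⟨a, b⟩ h1 h2
    obtain ⟨j1, _, hj1⟩ := List.mem_map.mp h1
    obtain ⟨j2, _, hj2⟩ := List.mem_map.mp h2
    rw [Prod.mk.injEq] at hj1 hj2
    exact hne (hj1.1.trans hj2.1.symm)

lemma card_pvGrid (r c : Int) : (pvGrid r c).card = r.toNat * c.toNat := by
  rw [pvGrid, List.toFinset_card_of_nodup (nodup_pvGridList r c)]
  rw [pvGridList, List.length_flatMap]
  have hmap : ((PySem.List.pyRange 0 r 1).map
      (fun i => ((PySem.List.pyRange 0 c 1).map (fun j => (i, j))).length))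
      = List.replicate (PySem.List.pyRange 0 r 1).length c.toNat := by
    rw [List.eq_replicate_iff]
    refine ⟨by simp, fun b hb => ?_⟩
    obtain ⟨i, _, rfl⟩ := List.mem_map.mp hb
    simp [PySem.List.length_pyRange_one]
  rw [hmap, List.sum_replicate, PySem.List.length_pyRange_one]
  simp [smul_eq_mul]

-- 4-neighbourhood, oil cells, adjacency and connectivity (proof-side notions)
def pvNbr (v w : Int × Int) : Prop :=
  (v.1 = w.1 ∧ (v.2 = w.2 + 1 ∨ w.2 = v.2 + 1)) ∨ (v.2 = w.2 ∧ (v.1 = w.1 + 1 ∨ w.1 = v.1 + 1))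

def pvGood (land : List (List Int)) (r c : Int) (v : Int × Int) : Prop :=
  0 ≤ v.1 ∧ v.1 < r ∧ 0 ≤ v.2 ∧ v.2 < c ∧ landAt land v.1 v.2 ≠ 0

def pvAdj (land : List (List Int)) (r c : Int) (v w : Int × Int) : Prop :=
  pvGood land r c v ∧ pvGood land r c w ∧ pvNbr v w

def pvReach (land : List (List Int)) (r c : Int) : (Int × Int) → (Int × Int) → Prop :=
  Relation.ReflTransGen (pvAdj land r c)

lemma pvNbr_offs (x y : Int) (d : Int × Int) (hd : d ∈ offs) :
    pvNbr (x, y) (x + d.1, y + d.2) := by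
  simp only [offs, List.mem_cons, List.not_mem_nil, or_false] at hd
  rcases hd with rfl | rfl | rfl | rfl <;> simp [pvNbr] <;> omega

lemma pvNbr_exists_off (x y : Int) (w : Int × Int) (h : pvNbr (x, y) w) :
    ∃ d ∈ offs, w = (x + d.1, y + d.2) := by
  rcases w with ⟨a, b⟩
  rcases h with ⟨h1, h2 | h2⟩ | ⟨h1, h2 | h2⟩
  · exact ⟨(0, -1), by simp [offs], by simp at h1 h2 ⊢; omega⟩
  · exact ⟨(0, 1), by simp [offs], by simp at h1 h2 ⊢; omega⟩
  · exact ⟨(-1, 0), by simp [offs], by simp at h1 h2 ⊢; omega⟩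
  · exact ⟨(1, 0), by simp [offs], by simp at h1 h2 ⊢; omega⟩

lemma pvAdj_symm (land : List (List Int)) (r c : Int) :
    Symmetric (pvAdj land r c) := by
  rintro v w ⟨hv, hw, hn⟩
  refine ⟨hw, hv, ?_⟩
  rcases hn with ⟨h1, h2⟩ | ⟨h1, h2⟩
  · exact Or.inl ⟨h1.symm, h2.symm⟩
  · exact Or.inr ⟨h1.symm, h2.symm⟩

lemma pvReach_symm (land : List (List Int)) (r c : Int) (u v : Int × Int)
    (h : pvReach land r c u v) : pvReach land r c v u :=
  Relation.ReflTransGen.symmetric (pvAdj_symm land r c) h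

lemma pvReach_trans (land : List (List Int)) (r c : Int) (u v w : Int × Int)
    (h1 : pvReach land r c u v) (h2 : pvReach land r c v w) : pvReach land r c u w :=
  Relation.ReflTransGen.trans h1 h2

lemma pvReach_closed (land : List (List Int)) (r c : Int) (P : (Int × Int) → Prop)
    (hcl : ∀ u, P u → ∀ w, pvAdj land r c u w → P w) (u v : Int × Int)
    (hu : P u) (h : pvReach land r c u v) : P v := by
  induction h with
  | refl => exact hu
  | tail _ hstep ih => exact hcl _ ih _ hstep

lemma foldl_grid {σ : Type} (r c : Int) (g : σ → (Int × Int) → σ) (init : σ) :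
    (PySem.List.pyRange 0 r 1).foldl (fun st i =>
      (PySem.List.pyRange 0 c 1).foldl (fun st j => g st (i, j)) st) init
    = (pvGridList r c).foldl g init := by
  rw [pvGridList, List.foldl_flatMap]
  apply PySem.List.foldl_congr_mem
  intro acc i _
  exact List.foldl_map.symm


-- ---------- A side: characterising the BFS labelling ----------

lemma stepA_measure (land : List (List Int)) (r c seq x y : Int) (hseq : seq ≠ -1)
    (st : ((Int × Int) → Int) × Int × List (Int × Int)) (d : Int × Int) :
    2 * ((pvGrid r c).filter (fun v => (stepA land r c seq x y st d).1 v = -1)).card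
      + (stepA land r c seq x y st d).2.2.length
    ≤ 2 * ((pvGrid r c).filter (fun v => st.1 v = -1)).card + st.2.2.length := by
  unfold stepA
  split
  · exact le_refl _
  split
  · exact le_refl _
  split
  · exact le_refl _
  · rename_i h1 _ h3
    simp only [List.length_append, List.length_singleton]
    have hmem : (x + d.1, y + d.2) ∈ (pvGrid r c).filter (fun v => st.1 v = -1) := by
      rw [Finset.mem_filter, mem_pvGrid]
      push_neg at h1
      obtain ⟨g1, g2, g3, g4⟩ := h1
      exact ⟨⟨g1, g2, g3, g4⟩, by simpa using h3⟩
    have hsub : (pvGrid r c).filter (fun v => (if v = (x + d.1, y + d.2) then seq else st.1 v) = -1)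
        ⊆ ((pvGrid r c).filter (fun v => st.1 v = -1)).erase (x + d.1, y + d.2) := by
      intro v hv
      simp only [Finset.mem_filter] at hv
      rcases hv with ⟨hg, hval⟩
      by_cases hvv : v = (x + d.1, y + d.2)
      · rw [if_pos hvv] at hval; exact absurd hval hseq
      · rw [if_neg hvv] at hval
        exact Finset.mem_erase.mpr ⟨hvv, Finset.mem_filter.mpr ⟨hg, hval⟩⟩
    have hcard := Finset.card_le_card hsub
    rw [Finset.card_erase_of_mem hmem] at hcard
    have hpos : 0 < ((pvGrid r c).filter (fun v => st.1 v = -1)).card :=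
      Finset.card_pos.mpr ⟨_, hmem⟩
    omega

lemma foldA_measure (land : List (List Int)) (r c seq x y : Int) (hseq : seq ≠ -1)
    (ds : List (Int × Int)) (st : ((Int × Int) → Int) × Int × List (Int × Int)) :
    2 * ((pvGrid r c).filter (fun v => (ds.foldl (stepA land r c seq x y) st).1 v = -1)).card
      + (ds.foldl (stepA land r c seq x y) st).2.2.length
    ≤ 2 * ((pvGrid r c).filter (fun v => st.1 v = -1)).card + st.2.2.length := by
  induction ds generalizing st with
  | nil => exact le_refl _
  | cons d ds ih =>
    exact le_trans (ih _) (stepA_measure land r c seq x y hseq st d)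

lemma foldA_spec (land : List (List Int)) (r c seq x y : Int) (hseq : seq ≠ -1)
    (ds : List (Int × Int)) (hds : ∀ d ∈ ds, d ∈ offs)
    (sep : (Int × Int) → Int) (cnt : Int) (q : List (Int × Int)) :
    ∃ new : List (Int × Int),
      ds.foldl (stepA land r c seq x y) (sep, cnt, q) =
        ((fun v => if v ∈ new then seq else sep v), cnt + new.length, q ++ new) ∧
      new.Nodup ∧
      (∀ v ∈ new, pvGood land r c v ∧ sep v = -1 ∧ pvNbr (x, y) v) ∧
      (∀ d ∈ ds, pvGood land r c (x + d.1, y + d.2) →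
        (if (x + d.1, y + d.2) ∈ new then seq else sep (x + d.1, y + d.2)) ≠ -1) := by
  induction ds generalizing sep cnt q with
  | nil => exact ⟨[], by simp, List.nodup_nil, by simp, by simp⟩
  | cons d ds ih =>
    have hdo : d ∈ offs := hds d List.mem_cons_self
    have hds' : ∀ d' ∈ ds, d' ∈ offs := fun d' hd' => hds d' (List.mem_cons_of_mem _ hd')
    simp only [List.foldl_cons]
    by_cases hg : x + d.1 < 0 ∨ r ≤ x + d.1 ∨ y + d.2 < 0 ∨ c ≤ y + d.2
    · rw [show stepA land r c seq x y (sep, cnt, q) d = (sep, cnt, q) from by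
        simp [stepA, hg]]
      obtain ⟨new, h1, h2, h3, h4⟩ := ih hds' sep cnt q
      refine ⟨new, h1, h2, h3, fun d' hd' => ?_⟩
      rcases List.mem_cons.mp hd' with heq | hmem
      · rw [heq]
        intro hgood
        exact absurd hg (by rcases hgood with ⟨g1, g2, g3, g4, g5⟩; push_neg; exact ⟨g1, g2, g3, g4⟩)
      · exact h4 d' hmem
    · by_cases hl : landAt land (x + d.1) (y + d.2) = 0
      · rw [show stepA land r c seq x y (sep, cnt, q) d = (sep, cnt, q) from by
          simp [stepA, hg, hl]]
        obtain ⟨new, h1, h2, h3, h4⟩ := ih hds' sep cnt q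
        refine ⟨new, h1, h2, h3, fun d' hd' => ?_⟩
        rcases List.mem_cons.mp hd' with heq | hmem
        · rw [heq]
          intro hgood
          exact absurd hl hgood.2.2.2.2
        · exact h4 d' hmem
      · by_cases hm : sep (x + d.1, y + d.2) ≠ -1
        · rw [show stepA land r c seq x y (sep, cnt, q) d = (sep, cnt, q) from by
            simp [stepA, hg, hl, hm]]
          obtain ⟨new, h1, h2, h3, h4⟩ := ih hds' sep cnt q
          refine ⟨new, h1, h2, h3, fun d' hd' => ?_⟩
          rcases List.mem_cons.mp hd' with heq | hmem
          · rw [heq]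
            intro _
            by_cases hw : (x + d.1, y + d.2) ∈ new
            · simp [hw, hseq]
            · simpa [hw] using hm
          · exact h4 d' hmem
        · push_neg at hm
          have hstep : stepA land r c seq x y (sep, cnt, q) d =
              ((fun v => if v = (x + d.1, y + d.2) then seq else sep v), cnt + 1,
                q ++ [(x + d.1, y + d.2)]) := by
            simp [stepA, hg, hl, hm]
          rw [hstep]
          obtain ⟨new1, h1, h2, h3, h4⟩ := ih hds'
            (fun v => if v = (x + d.1, y + d.2) then seq else sep v) (cnt + 1)
            (q ++ [(x + d.1, y + d.2)])
          have hwnew : (x + d.1, y + d.2) ∉ new1 := by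
            intro hmem
            have := (h3 _ hmem).2.1
            simp [hseq] at this
          have hgood : pvGood land r c (x + d.1, y + d.2) := by
            push_neg at hg
            exact ⟨hg.1, hg.2.1, hg.2.2.1, hg.2.2.2, hl⟩
          refine ⟨(x + d.1, y + d.2) :: new1, ?_, List.nodup_cons.mpr ⟨hwnew, h2⟩, ?_, ?_⟩
          · rw [h1]
            refine Prod.ext ?_ (Prod.ext (by simp; omega) (by simp))
            funext v
            by_cases hv1 : v ∈ new1
            · simp [hv1]
            · by_cases hvw : v = (x + d.1, y + d.2) <;> simp [hv1, hvw]
          · intro v hv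
            rcases List.mem_cons.mp hv with rfl | hv1
            · exact ⟨hgood, hm, pvNbr_offs x y d hdo⟩
            · obtain ⟨g1, g2, g3⟩ := h3 v hv1
              refine ⟨g1, ?_, g3⟩
              by_cases hvw : v = (x + d.1, y + d.2)
              · rw [if_pos hvw] at g2; exact absurd g2 hseq
              · rwa [if_neg hvw] at g2
          · intro d' hd'
            rcases List.mem_cons.mp hd' with heq | hmem
            · rw [heq]
              intro _
              simp [hseq]
            · intro hgood'
              have h4' := h4 d' hmem hgood'
              by_cases hin : (x + d'.1, y + d'.2) ∈ (x + d.1, y + d.2) :: new1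
              · simp [hin, hseq]
              · rw [if_neg hin]
                rw [List.mem_cons] at hin
                push_neg at hin
                rw [if_neg hin.2, if_neg hin.1] at h4'
                exact h4'

lemma bfsA_spec (land : List (List Int)) (r c seq : Int) (seed : Int × Int) (hseq : seq ≠ -1) :
    ∀ (fuel : Nat) (sep : (Int × Int) → Int) (cnt : Int) (q : List (Int × Int)),
    2 * ((pvGrid r c).filter (fun v => sep v = -1)).card + q.length < fuel →
    (∀ u ∈ q, pvGood land r c u ∧ sep u ≠ -1 ∧ pvReach land r c seed u) →
    (∀ u, sep u ≠ -1 → u ∉ q → ∀ w, pvAdj land r c u w → sep w ≠ -1) →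
    ∃ F : Finset (Int × Int),
      (bfsA land r c seq fuel sep cnt q).1 = (fun v => if v ∈ F then seq else sep v) ∧
      (∀ v ∈ F, sep v = -1 ∧ pvGood land r c v ∧ pvReach land r c seed v) ∧
      (bfsA land r c seq fuel sep cnt q).2 = cnt + F.card ∧
      (∀ u, (bfsA land r c seq fuel sep cnt q).1 u ≠ -1 → ∀ w, pvAdj land r c u w →
        (bfsA land r c seq fuel sep cnt q).1 w ≠ -1) := by
  intro fuel
  induction fuel with
  | zero =>
    intro sep cnt q hfuel
    exact absurd hfuel (by omega)
  | succ fuel ih =>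
    intro sep cnt q hfuel Hq Hcl
    match q with
    | [] =>
      have hb : bfsA land r c seq (fuel + 1) sep cnt [] = (sep, cnt) := rfl
      refine ⟨∅, ?_, by simp, ?_, ?_⟩
      · rw [hb]; funext v; simp
      · rw [hb]; simp
      · intro u hu w hadj
        rw [hb] at hu ⊢
        exact Hcl u hu (List.not_mem_nil) w hadj
    | (x, y) :: q =>
      obtain ⟨new, hfold, hnodup, hmem, hcov⟩ :=
        foldA_spec land r c seq x y hseq offs (fun d hd => hd) sep cnt q
      have hb : bfsA land r c seq (fuel + 1) sep cnt ((x, y) :: q) =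
          bfsA land r c seq fuel (fun v => if v ∈ new then seq else sep v)
            (cnt + (new.length : Int)) (q ++ new) := by
        show bfsA land r c seq fuel
            (offs.foldl (stepA land r c seq x y) (sep, cnt, q)).1
            (offs.foldl (stepA land r c seq x y) (sep, cnt, q)).2.1
            (offs.foldl (stepA land r c seq x y) (sep, cnt, q)).2.2 = _
        rw [hfold]
      have hfuel' : 2 * ((pvGrid r c).filter
            (fun v => (if v ∈ new then seq else sep v) = -1)).card + (q ++ new).length < fuel := by
        have hmeas := foldA_measure land r c seq x y hseq offs (sep, cnt, q)
        rw [hfold] at hmeas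
        simp only [List.length_cons] at hfuel
        dsimp only at hmeas
        omega
      have hseedgood := (Hq (x, y) List.mem_cons_self).1
      have hseedreach := (Hq (x, y) List.mem_cons_self).2.2
      have Hq' : ∀ u ∈ q ++ new, pvGood land r c u ∧
          (if u ∈ new then seq else sep u) ≠ -1 ∧ pvReach land r c seed u := by
        intro u hu
        rcases List.mem_append.mp hu with hq1 | hn1
        · obtain ⟨g1, g2, g3⟩ := Hq u (List.mem_cons_of_mem _ hq1)
          refine ⟨g1, ?_, g3⟩
          by_cases hun : u ∈ new
          · simp [hun, hseq]
          · simpa [hun] using g2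
        · obtain ⟨g1, g2, g3⟩ := hmem u hn1
          exact ⟨g1, by simp [hn1, hseq],
            hseedreach.tail ⟨hseedgood, g1, g3⟩⟩
      have Hcl' : ∀ u, (if u ∈ new then seq else sep u) ≠ -1 → u ∉ q ++ new →
          ∀ w, pvAdj land r c u w → (if w ∈ new then seq else sep w) ≠ -1 := by
        intro u hu hnotin w hadj
        have hun : u ∉ new := fun h => hnotin (List.mem_append.mpr (Or.inr h))
        rw [if_neg hun] at hu
        by_cases hux : u = (x, y)
        · obtain ⟨d, hd, hw⟩ := pvNbr_exists_off x y w (hux ▸ hadj.2.2)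
          rw [hw]
          exact hcov d hd (by rw [← hw]; exact hadj.2.1)
        · have := Hcl u hu (by
            intro hmem2
            rcases List.mem_cons.mp hmem2 with h1 | h1
            · exact hux h1
            · exact hnotin (List.mem_append.mpr (Or.inl h1))) w hadj
          by_cases hwn : w ∈ new
          · simp [hwn, hseq]
          · simpa [hwn] using this
      obtain ⟨F1, k1, k2, k3, k4⟩ := ih _ _ _ hfuel' Hq' Hcl'
      have hdisj : Disjoint F1 new.toFinset := by
        rw [Finset.disjoint_right]
        intro v hv
        intro hvF1
        have := (k2 v hvF1).1
        rw [List.mem_toFinset] at hv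
        rw [if_pos hv] at this
        exact hseq this
      refine ⟨F1 ∪ new.toFinset, ?_, ?_, ?_, ?_⟩
      · rw [hb, k1]
        funext v
        by_cases hv1 : v ∈ F1
        · simp [hv1]
        · by_cases hv2 : v ∈ new
          · simp [hv1, hv2]
          · simp [hv1, hv2]
      · intro v hv
        rcases Finset.mem_union.mp hv with hv1 | hv2
        · obtain ⟨g1, g2, g3⟩ := k2 v hv1
          by_cases hvn : v ∈ new
          · rw [if_pos hvn] at g1; exact absurd g1 hseq
          · rw [if_neg hvn] at g1
            exact ⟨g1, g2, g3⟩
        · rw [List.mem_toFinset] at hv2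
          obtain ⟨g1, g2, g3⟩ := hmem v hv2
          exact ⟨g2, g1, hseedreach.tail ⟨hseedgood, g1, g3⟩⟩
      · rw [hb, k3, Finset.card_union_of_disjoint hdisj.symm.symm,
          List.toFinset_card_of_nodup hnodup]
        push_cast
        ring
      · intro u hu w hadj
        rw [hb] at hu ⊢
        exact k4 u hu w hadj

-- A's loop invariant: the labelled cells split into classes Cs, each a full connectivity
-- class; oil holds the class sizes; every processed oil cell is labelled
def pvInvA (land : List (List Int)) (r c : Int) (processed : List (Int × Int))
    (sep : (Int × Int) → Int) (oil : Int → Int) (seq : Int) : Prop :=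
  ∃ Cs : List (Finset (Int × Int)),
    seq = (Cs.length : Int) + 1 ∧
    (∀ v, sep v ≠ -1 ↔ ∃ k, ∃ _ : k < Cs.length, v ∈ Cs.getD k ∅) ∧
    (∀ k, k < Cs.length → ∀ v ∈ Cs.getD k ∅, sep v = (k : Int) + 1) ∧
    (∀ k, k < Cs.length → oil ((k : Int) + 1) = ((Cs.getD k ∅).card : Int)) ∧
    (∀ k, k < Cs.length → ∀ v ∈ Cs.getD k ∅, ∀ w, w ∈ Cs.getD k ∅ ↔ pvReach land r c v w) ∧
    (∀ v, sep v ≠ -1 → pvGood land r c v) ∧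
    (∀ v ∈ processed, pvGood land r c v → sep v ≠ -1)

lemma pvInvA_step (land : List (List Int)) (r c : Int) (L : List (Int × Int)) (v : Int × Int)
    (hv : 0 ≤ v.1 ∧ v.1 < r ∧ 0 ≤ v.2 ∧ v.2 < c)
    (sep : (Int × Int) → Int) (oil : Int → Int) (seq : Int)
    (h : pvInvA land r c L sep oil seq) :
    pvInvA land r c (L ++ [v]) (cellA land r c (sep, oil, seq) v).1
      (cellA land r c (sep, oil, seq) v).2.1 (cellA land r c (sep, oil, seq) v).2.2 := by
  obtain ⟨Cs, c1, c2, c3, c4, c5, c6, c7⟩ := h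
  have hseqne : seq ≠ -1 := by omega
  have hclosed : ∀ u, sep u ≠ -1 → ∀ w, pvAdj land r c u w → sep w ≠ -1 := by
    intro u hu w hadj
    obtain ⟨k, hk, hmem⟩ := (c2 u).mp hu
    have hw : w ∈ Cs.getD k ∅ := (c5 k hk u hmem w).mpr (Relation.ReflTransGen.single hadj)
    rw [c3 k hk w hw]
    omega
  by_cases hskip : sep v ≠ -1 ∨ landAt land v.1 v.2 = 0
  · have hA : cellA land r c (sep, oil, seq) v = (sep, oil, seq) := by
      simp only [cellA]
      rw [if_pos hskip]
    rw [hA]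
    refine ⟨Cs, c1, c2, c3, c4, c5, c6, ?_⟩
    intro w hw hgw
    rcases List.mem_append.mp hw with h1 | h1
    · exact c7 w h1 hgw
    · rw [List.mem_singleton] at h1
      subst h1
      rcases hskip with h2 | h2
      · exact h2
      · exact absurd h2 hgw.2.2.2.2
  · push_neg at hskip
    obtain ⟨hsep', hland⟩ := hskip
    have hsep : sep v = -1 := by simpa using hsep'
    have hgood : pvGood land r c v := ⟨hv.1, hv.2.1, hv.2.2.1, hv.2.2.2, hland⟩
    have hcondA : ¬((sep, oil, seq).1 v ≠ -1 ∨ landAt land v.1 v.2 = 0) := by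
      simp [hsep, hland]
    have hA : cellA land r c (sep, oil, seq) v =
        ((bfsA land r c seq (2 * (r.toNat * c.toNat) + 2)
            (fun w => if w = v then seq else sep w) 1 [v]).1,
         (fun l => if l = seq then
            (bfsA land r c seq (2 * (r.toNat * c.toNat) + 2)
              (fun w => if w = v then seq else sep w) 1 [v]).2 else oil l),
         seq + 1) := by
      simp only [cellA]
      rw [if_neg hcondA]
    have hunlab : ∀ w, pvReach land r c v w → w ≠ v → sep w = -1 := by
      intro w hr hne
      by_contra hw
      exact pvReach_closed land r c (fun u => sep u ≠ -1) hclosed w v hw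
        (pvReach_symm land r c v w hr) hsep
    have hfuel : 2 * ((pvGrid r c).filter
          (fun w => (if w = v then seq else sep w) = -1)).card + [v].length
        < 2 * (r.toNat * c.toNat) + 2 := by
      have h1 : ((pvGrid r c).filter (fun w => (if w = v then seq else sep w) = -1)).card
          ≤ (pvGrid r c).card := Finset.card_le_card (Finset.filter_subset _ _)
      have h2 := card_pvGrid r c
      simp only [List.length_singleton]
      omega
    obtain ⟨FA, a1, a2, a3, a4⟩ := bfsA_spec land r c seq v hseqne
      (2 * (r.toNat * c.toNat) + 2) (fun w => if w = v then seq else sep w) 1 [v]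
      hfuel
      (by
        intro u hu
        rw [List.mem_singleton] at hu
        subst hu
        exact ⟨hgood, by simp [hseqne], Relation.ReflTransGen.refl⟩)
      (by
        intro u hu hnotin w hadj
        rw [List.mem_singleton] at hnotin
        dsimp only at hu
        rw [if_neg hnotin] at hu
        have := hclosed u hu w hadj
        by_cases hwv : w = v
        · simp [hwv, hseqne]
        · simpa [hwv] using this)
    have hFA : ∀ w, w ∈ FA ↔ pvReach land r c v w ∧ w ≠ v := by
      intro w
      constructor
      · intro hw
        obtain ⟨g1, g2, g3⟩ := a2 w hw
        have hne : w ≠ v := by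
          intro he
          rw [if_pos he] at g1
          exact hseqne g1
        exact ⟨g3, hne⟩
      · rintro ⟨hr, hne⟩
        have hm : (bfsA land r c seq (2 * (r.toNat * c.toNat) + 2)
            (fun w => if w = v then seq else sep w) 1 [v]).1 v ≠ -1 := by
          rw [a1]
          by_cases hvv : v ∈ FA <;> simp [hvv, hseqne]
        have hmw := pvReach_closed land r c
          (fun u => (bfsA land r c seq (2 * (r.toNat * c.toNat) + 2)
            (fun w => if w = v then seq else sep w) 1 [v]).1 u ≠ -1)
          a4 v w hm hr
        rw [a1] at hmw
        dsimp only at hmw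
        by_cases hwFA : w ∈ FA
        · exact hwFA
        · rw [if_neg hwFA, if_neg hne] at hmw
          exact absurd (hunlab w hr hne) hmw
    have hvFA : v ∉ FA := fun hmem => ((hFA v).mp hmem).2 rfl
    rw [hA]
    dsimp only
    have hlt : ∀ (k : ℕ), k < Cs.length →
        (Cs ++ [insert v FA]).getD k ∅ = Cs.getD k ∅ := by
      intro k hk
      simp [List.getD_eq_getElem?_getD, List.getElem?_append_left hk]
    have hgeq : (Cs ++ [insert v FA]).getD Cs.length ∅ = insert v FA := by
      simp [List.getD_eq_getElem?_getD, List.getElem?_concat_length]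
    have hmem_ins : ∀ w, w ∈ insert v FA ↔ pvReach land r c v w := by
      intro w
      rw [Finset.mem_insert, hFA]
      constructor
      · rintro (rfl | ⟨h1, _⟩)
        · exact Relation.ReflTransGen.refl
        · exact h1
      · intro hr
        by_cases hwv : w = v
        · exact Or.inl hwv
        · exact Or.inr ⟨hr, hwv⟩
    have hsep_of_mem : ∀ (k : ℕ), k < Cs.length → ∀ w ∈ Cs.getD k ∅, sep w ≠ -1 := by
      intro k hk w hw
      rw [c3 k hk w hw]
      omega
    have hnotFA : ∀ (k : ℕ), k < Cs.length → ∀ w ∈ Cs.getD k ∅, w ∉ FA ∧ w ≠ v := by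
      intro k hk w hw
      have hsw := hsep_of_mem k hk w hw
      constructor
      · intro hmem
        exact hsw (hunlab w ((hFA w).mp hmem).1 ((hFA w).mp hmem).2)
      · intro he
        rw [he] at hsw
        exact hsw hsep
    refine ⟨Cs ++ [insert v FA], ?_, ?_, ?_, ?_, ?_, ?_, ?_⟩
    · simp only [List.length_append, List.length_singleton]
      push_cast
      omega
    · intro w
      rw [a1]
      dsimp only
      constructor
      · intro hw
        by_cases hwFA : w ∈ FA
        · exact ⟨Cs.length, by simp, by rw [hgeq]; exact Finset.mem_insert_of_mem hwFA⟩
        · rw [if_neg hwFA] at hw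
          by_cases hwv : w = v
          · exact ⟨Cs.length, by simp, by rw [hgeq, hwv]; exact Finset.mem_insert_self v _⟩
          · rw [if_neg hwv] at hw
            obtain ⟨k, hk, hmem⟩ := (c2 w).mp hw
            exact ⟨k, by simp; omega, by rw [hlt k hk]; exact hmem⟩
      · rintro ⟨k, hk, hmem⟩
        simp only [List.length_append, List.length_singleton] at hk
        by_cases hkl : k < Cs.length
        · rw [hlt k hkl] at hmem
          obtain ⟨hnF, hnv⟩ := hnotFA k hkl w hmem
          rw [if_neg hnF, if_neg hnv]
          exact hsep_of_mem k hkl w hmem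
        · have hkeq : k = Cs.length := by omega
          rw [hkeq, hgeq] at hmem
          rcases Finset.mem_insert.mp hmem with rfl | hmem2
          · by_cases hvv : w ∈ FA <;> simp [hvv, hseqne]
          · rw [if_pos hmem2]
            exact hseqne
    · intro k hk w hw
      simp only [List.length_append, List.length_singleton] at hk
      rw [a1]
      dsimp only
      by_cases hkl : k < Cs.length
      · rw [hlt k hkl] at hw
        obtain ⟨hnF, hnv⟩ := hnotFA k hkl w hw
        rw [if_neg hnF, if_neg hnv]
        exact c3 k hkl w hw
      · have hkeq : k = Cs.length := by omega
        rw [hkeq, hgeq] at hw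
        rw [hkeq, ← c1]
        rcases Finset.mem_insert.mp hw with rfl | hmem2
        · by_cases hvv : w ∈ FA <;> simp [hvv]
        · rw [if_pos hmem2]
    · intro k hk
      simp only [List.length_append, List.length_singleton] at hk
      dsimp only
      by_cases hkl : k < Cs.length
      · rw [hlt k hkl]
        rw [if_neg (by omega : ¬((k : Int) + 1 = seq))]
        exact c4 k hkl
      · have hkeq : k = Cs.length := by omega
        rw [hkeq, hgeq]
        rw [if_pos (by omega : ((Cs.length : Int) + 1 = seq))]
        rw [a3, Finset.card_insert_of_notMem hvFA]
        push_cast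
        omega
    · intro k hk u hu w
      simp only [List.length_append, List.length_singleton] at hk
      by_cases hkl : k < Cs.length
      · rw [hlt k hkl] at hu ⊢
        exact c5 k hkl u hu w
      · have hkeq : k = Cs.length := by omega
        rw [hkeq, hgeq] at hu ⊢
        rw [hmem_ins] at hu
        rw [hmem_ins]
        constructor
        · intro hr
          exact pvReach_trans land r c u v w (pvReach_symm land r c v u hu) hr
        · intro hr
          exact pvReach_trans land r c v u w hu hr
    · intro w hw
      rw [a1] at hw
      dsimp only at hw
      by_cases hwFA : w ∈ FA
      · exact (a2 w hwFA).2.1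
      · rw [if_neg hwFA] at hw
        by_cases hwv : w = v
        · rw [hwv]; exact hgood
        · rw [if_neg hwv] at hw
          exact c6 w hw
    · intro w hw hgw
      rw [a1]
      dsimp only
      rcases List.mem_append.mp hw with h1 | h1
      · have := c7 w h1 hgw
        obtain ⟨hnF, hnv⟩ : w ∉ FA ∧ w ≠ v := by
          obtain ⟨k, hk, hmem⟩ := (c2 w).mp this
          exact hnotFA k hk w hmem
        rw [if_neg hnF, if_neg hnv]
        exact this
      · rw [List.mem_singleton] at h1
        subst h1
        by_cases hvv : w ∈ FA <;> simp [hvv, hseqne]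

lemma pvInvA_fold (land : List (List Int)) (r c : Int) (cells : List (Int × Int))
    (hcells : ∀ v ∈ cells, 0 ≤ v.1 ∧ v.1 < r ∧ 0 ≤ v.2 ∧ v.2 < c)
    (L : List (Int × Int))
    (sep : (Int × Int) → Int) (oil : Int → Int) (seq : Int)
    (h : pvInvA land r c L sep oil seq) :
    pvInvA land r c (L ++ cells) (cells.foldl (cellA land r c) (sep, oil, seq)).1
      (cells.foldl (cellA land r c) (sep, oil, seq)).2.1
      (cells.foldl (cellA land r c) (sep, oil, seq)).2.2 := by
  induction cells generalizing L sep oil seq with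
  | nil => simpa using h
  | cons v cells ih =>
    simp only [List.foldl_cons]
    have := ih (fun w hw => hcells w (List.mem_cons_of_mem _ hw)) (L ++ [v]) _ _ _
      (pvInvA_step land r c L v (hcells v List.mem_cons_self) sep oil seq h)
    simpa using this

lemma pvInvA_init (land : List (List Int)) (r c : Int) :
    pvInvA land r c [] (fun _ => -1) (fun _ => 0) 1 := by
  refine ⟨[], by simp, by simp, ?_, ?_, ?_, by simp, by simp⟩
  · intro k hk; exact absurd hk (Nat.not_lt_zero k)
  · intro k hk; exact absurd hk (Nat.not_lt_zero k)
  · intro k hk; exact absurd hk (Nat.not_lt_zero k)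

-- a first-occurrence-only accumulation is a sum over the distinct values
lemma dedupSum (f : Int → Int) (ls : List Int) (vis : Int → Int) (acc : Int) :
    (ls.foldl (fun (p : (Int → Int) × Int) l =>
      if l = -1 then p else if p.1 l ≠ 0 then p
      else ((fun t => if t = l then 1 else p.1 t), p.2 + f l)) (vis, acc)).2
    = acc + ∑ l ∈ ls.toFinset.filter (fun l => ¬l = -1 ∧ vis l = 0), f l := by
  induction ls generalizing vis acc with
  | nil => simp
  | cons l t ih =>
    simp only [List.foldl_cons]
    by_cases hl : l = -1
    · rw [if_pos hl, ih]
      congr 1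
      rw [List.toFinset_cons, Finset.filter_insert, if_neg (by simp [hl])]
    · by_cases hv : vis l = 0
      · rw [if_neg hl, if_neg (by simpa using hv)]
        rw [ih]
        have hset : t.toFinset.filter
              (fun x => ¬x = -1 ∧ (if x = l then (1 : Int) else vis x) = 0)
            = (t.toFinset.filter (fun x => ¬x = -1 ∧ vis x = 0)).erase l := by
          ext x
          simp only [Finset.mem_filter, Finset.mem_erase]
          by_cases hx : x = l
          · simp [hx]
          · simp [hx]
        rw [hset]
        rw [List.toFinset_cons, Finset.filter_insert, if_pos ⟨hl, hv⟩]
        have hins : insert l (t.toFinset.filter (fun x => ¬x = -1 ∧ vis x = 0))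
            = insert l ((t.toFinset.filter (fun x => ¬x = -1 ∧ vis x = 0)).erase l) := by
          ext x
          by_cases hx : x = l <;> simp [hx]
        rw [hins, Finset.sum_insert (Finset.notMem_erase _ _)]
        ring
      · rw [if_neg hl, if_pos (by simpa using hv), ih]
        congr 1
        rw [List.toFinset_cons, Finset.filter_insert, if_neg (by simp [hv])]

lemma colA_sum (land : List (List Int)) (r c : Int) (sep : (Int × Int) → Int) (oil : Int → Int)
    (Cs : List (Finset (Int × Int)))
    (c2 : ∀ v, sep v ≠ -1 ↔ ∃ k, ∃ _ : k < Cs.length, v ∈ Cs.getD k ∅)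
    (c4 : ∀ k, k < Cs.length → ∀ v ∈ Cs.getD k ∅, sep v = (k : Int) + 1)
    (c5 : ∀ k, k < Cs.length → oil ((k : Int) + 1) = ((Cs.getD k ∅).card : Int))
    (c8 : ∀ v, sep v ≠ -1 → pvGood land r c v) (i : Int) :
    ((PySem.List.pyRange 0 r 1).foldl (colA sep oil i) ((fun _ => (0 : Int)), (0 : Int))).2
    = ∑ k ∈ (Finset.range Cs.length).filter (fun k => ∃ w ∈ Cs.getD k ∅, w.2 = i),
        ((Cs.getD k ∅).card : Int) := by
  have h1 : (PySem.List.pyRange 0 r 1).foldl (colA sep oil i) ((fun _ => (0 : Int)), (0 : Int))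
      = ((PySem.List.pyRange 0 r 1).map (fun j => sep (j, i))).foldl
          (fun (p : (Int → Int) × Int) l => if l = -1 then p else if p.1 l ≠ 0 then p
            else ((fun t => if t = l then 1 else p.1 t), p.2 + oil l))
          ((fun _ => (0 : Int)), (0 : Int)) := by
    rw [List.foldl_map]
    rfl
  rw [h1, dedupSum]
  have hpred : ((PySem.List.pyRange 0 r 1).map (fun j => sep (j, i))).toFinset.filter
        (fun l => ¬l = -1 ∧ (fun _ => (0 : Int)) l = 0)
      = ((PySem.List.pyRange 0 r 1).map (fun j => sep (j, i))).toFinset.filter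
        (fun l => ¬l = -1) := by
    apply Finset.filter_congr
    intro x _
    simp
  rw [hpred]
  have hset : ((PySem.List.pyRange 0 r 1).map (fun j => sep (j, i))).toFinset.filter
        (fun l => ¬l = -1)
      = ((Finset.range Cs.length).filter
          (fun k => ∃ w ∈ Cs.getD k ∅, w.2 = i)).image (fun k : ℕ => (k : Int) + 1) := by
    ext l
    simp only [List.mem_toFinset, List.mem_map, Finset.mem_filter, Finset.mem_image,
      Finset.mem_range, PySem.List.mem_pyRange_one]
    constructor
    · rintro ⟨⟨j, hj, rfl⟩, hne⟩
      obtain ⟨k, hk, hmem⟩ := (c2 (j, i)).mp hne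
      exact ⟨k, ⟨hk, ⟨(j, i), hmem, rfl⟩⟩, (c4 k hk _ hmem).symm⟩
    · rintro ⟨k, ⟨hk, w, hw, hw2⟩, rfl⟩
      have hsw : sep w = (k : Int) + 1 := c4 k hk w hw
      have hsne : sep w ≠ -1 := by rw [hsw]; omega
      have hg := c8 w hsne
      refine ⟨⟨w.1, ⟨hg.1, hg.2.1⟩, ?_⟩, by omega⟩
      have hwe : (w.1, i) = w := by rw [← hw2]
      rw [hwe, hsw]
  rw [hset, Finset.sum_image (by intro a _ b _ hab; simp at hab; omega)]
  rw [zero_add]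
  exact Finset.sum_congr rfl
    (fun k hk => c5 k (Finset.mem_range.mp (Finset.mem_filter.mp hk).1))


-- ---------- B side: the union-find structure ----------

lemma findRoot_of_root (p : Int → Int) (a : Int) (h : p a = a) :
    ∀ f, findRoot p f a = a
  | 0 => rfl
  | f + 1 => by simp [findRoot, h]

lemma findRoot_unfold (p : Int → Int) (f : Nat) (a : Int) (h : p a ≠ a) :
    findRoot p (f + 1) a = findRoot p f (p a) := by
  simp [findRoot, h]

lemma findRoot_stable (p : Int → Int) (d : Int → Nat)
    (hd : ∀ x, p x ≠ x → d (p x) < d x) :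
    ∀ (f : Nat) (a : Int), d a < f →
      p (findRoot p f a) = findRoot p f a ∧
      ∀ f', d a < f' → findRoot p f' a = findRoot p f a := by
  intro f
  induction f with
  | zero => intro a ha; exact absurd ha (by omega)
  | succ f ih =>
    intro a ha
    by_cases hpa : p a = a
    · rw [findRoot_of_root p a hpa]
      exact ⟨hpa, fun f' _ => findRoot_of_root p a hpa f'⟩
    · have hda : d (p a) < d a := hd a hpa
      have hdf : d (p a) < f := by omega
      obtain ⟨hfix, hstab⟩ := ih (p a) hdf
      rw [findRoot_unfold p f a hpa]
      refine ⟨hfix, fun f' hf' => ?_⟩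
      have hf1 : ∃ g, f' = g + 1 ∧ d (p a) < g := ⟨f' - 1, by omega, by omega⟩
      obtain ⟨g, rfl, hg⟩ := hf1
      rw [findRoot_unfold p g a hpa]
      exact hstab g hg

lemma findRoot_chain (p : Int → Int) (d : Int → Nat)
    (hd : ∀ x, p x ≠ x → d (p x) < d x) (f : Nat) (a : Int) (ha : d a < f)
    (hpa : p a ≠ a) : findRoot p f a = findRoot p f (p a) := by
  have hf1 : ∃ g, f = g + 1 ∧ d a < g + 1 := ⟨f - 1, by omega, by omega⟩
  obtain ⟨g, rfl, _⟩ := hf1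
  rw [findRoot_unfold p g a hpa]
  exact ((findRoot_stable p d hd g (p a) (by have := hd a hpa; omega)).2
    (g + 1) (by have := hd a hpa; omega)).symm

lemma findRoot_reassign (p : Int → Int) (d : Int → Nat)
    (hd : ∀ x, p x ≠ x → d (p x) < d x) (ra rb : Int)
    (hra : p ra = ra) (hrb : p rb = rb) (hne : ra ≠ rb) :
    ∀ (f : Nat) (a : Int), d a < f →
      findRoot (fun x => if x = rb then ra else p x) f a =
        if findRoot p f a = rb then ra else findRoot p f a := by
  intro f
  induction f with
  | zero => intro a ha; exact absurd ha (by omega)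
  | succ f ih =>
    intro a ha
    by_cases harb : a = rb
    · have hp'a : (fun x => if x = rb then ra else p x) a = ra := by rw [harb]; simp
      have hne' : (fun x => if x = rb then ra else p x) a ≠ a := by
        rw [hp'a, harb]; exact hne
      have hroot : (if ra = rb then ra else p ra) = ra := by rw [if_neg hne, hra]
      rw [findRoot_unfold _ f a hne', if_pos harb, findRoot_of_root _ ra hroot,
        harb, findRoot_of_root p rb hrb, if_pos rfl]
    · by_cases hpa : p a = a
      · rw [findRoot_of_root p a hpa, findRoot_of_root _ a (by simp [harb, hpa]), if_neg harb]
      · have hub : findRoot p (f + 1) a = findRoot p f (p a) := findRoot_unfold p f a hpa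
        have hub' : findRoot (fun x => if x = rb then ra else p x) (f + 1) a
            = findRoot (fun x => if x = rb then ra else p x) f (p a) := by
          rw [findRoot_unfold _ f a (by simp [harb]; exact hpa)]
          simp [harb]
        rw [hub, hub', ih (p a) (by have := hd a hpa; omega)]

-- the union-find invariant: cls gives the current partition of the node set N
def UFInv (f : Nat) (N : Finset Int) (p s : Int → Int) (cls : Int → Finset Int) : Prop :=
  N.card ≤ f ∧
  (∀ a, a ∉ N → p a = a) ∧
  (∀ a ∈ N, a ∈ cls a) ∧
  (∀ a ∈ N, cls a ⊆ N) ∧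
  (∀ a ∈ N, ∀ b ∈ cls a, cls b = cls a) ∧
  (∀ a ∈ N, p a ∈ cls a) ∧
  (∀ a ∈ N, findRoot p f a ∈ cls a) ∧
  (∀ a ∈ N, ∀ b ∈ cls a, findRoot p f b = findRoot p f a) ∧
  (∀ a ∈ N, s (findRoot p f a) = ((cls a).card : Int)) ∧
  (∃ d : Int → Nat, (∀ x, p x ≠ x → d (p x) < d x) ∧ ∀ a ∈ N, d a < (cls a).card)

lemma UFInv_init (f : Nat) (N : Finset Int) (hf : N.card ≤ f) :
    UFInv f N (fun x => x) (fun _ => 1) (fun x => {x}) := by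
  refine ⟨hf, fun a _ => rfl, by simp, ?_, ?_, by simp, ?_, ?_, ?_, ?_⟩
  · intro a ha
    intro b hb
    rw [Finset.mem_singleton] at hb
    rwa [hb]
  · intro a _ b hb
    rw [Finset.mem_singleton] at hb
    rw [hb]
  · intro a _
    rw [findRoot_of_root _ a rfl]
    simp
  · intro a _ b hb
    rw [Finset.mem_singleton] at hb
    rw [hb]
  · intro a _
    rw [findRoot_of_root _ a rfl]
    simp
  · exact ⟨fun _ => 0, fun x hx => absurd rfl hx, by simp⟩

lemma UFInv_congr (f : Nat) (N : Finset Int) (p s : Int → Int)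
    (cls cls' : Int → Finset Int) (hc : ∀ x ∈ N, cls' x = cls x)
    (h : UFInv f N p s cls) : UFInv f N p s cls' := by
  obtain ⟨h1, h2, h3, h4, h5, h6, h7, h8, h9, h10⟩ := h
  refine ⟨h1, h2, ?_, ?_, ?_, ?_, ?_, ?_, ?_, ?_⟩
  · intro a ha; rw [hc a ha]; exact h3 a ha
  · intro a ha; rw [hc a ha]; exact h4 a ha
  · intro a ha b hb
    rw [hc a ha] at hb ⊢
    rw [hc b (h4 a ha hb)]
    exact h5 a ha b hb
  · intro a ha; rw [hc a ha]; exact h6 a ha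
  · intro a ha; rw [hc a ha]; exact h7 a ha
  · intro a ha b hb
    rw [hc a ha] at hb
    exact h8 a ha b hb
  · intro a ha; rw [hc a ha]; exact h9 a ha
  · obtain ⟨d, hd1, hd2⟩ := h10
    exact ⟨d, hd1, fun a ha => by rw [hc a ha]; exact hd2 a ha⟩

-- attaching root rb below root ra (the core of union)
lemma uf_attach_inv (f : Nat) (N : Finset Int) (p s : Int → Int)
    (cls : Int → Finset Int) (h : UFInv f N p s cls) (ra rb : Int)
    (hraN : ra ∈ N) (hrbN : rb ∈ N) (hra : p ra = ra) (hrb : p rb = rb)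
    (hne : ra ≠ rb) :
    UFInv f N (fun x => if x = rb then ra else p x)
      (fun x => if x = ra then s ra + s rb else s x)
      (fun x => if x ∈ cls ra ∪ cls rb then cls ra ∪ cls rb else cls x) := by
  obtain ⟨h1, h2, h3, h4, h5, h6, h7, h8, h9, d, hd1, hd2⟩ := h
  have hcard_le : ∀ a ∈ N, (cls a).card ≤ f :=
    fun a ha => le_trans (Finset.card_le_card (h4 a ha)) h1
  have hdf : ∀ a ∈ N, d a < f := fun a ha => lt_of_lt_of_le (hd2 a ha) (hcard_le a ha)
  have hRra : findRoot p f ra = ra := findRoot_of_root p ra hra f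
  have hRrb : findRoot p f rb = rb := findRoot_of_root p rb hrb f
  -- root = rb iff membership in cls rb, and similarly for ra
  have hRmem : ∀ t ∈ N, ∀ a ∈ N, p t = t → (findRoot p f a = t ↔ a ∈ cls t) := by
    intro t ht a haN hroot
    constructor
    · intro hR
      have : findRoot p f a ∈ cls a := h7 a haN
      rw [hR] at this
      rw [h5 a haN t this]
      exact h3 a haN
    · intro hmem
      rw [h8 t ht a hmem]
      exact findRoot_of_root p t hroot f
  have hdisj : Disjoint (cls ra) (cls rb) := by
    rw [Finset.disjoint_left]
    intro x hxa hxb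
    have hxN : x ∈ N := h4 ra hraN hxa
    have e1 := h8 ra hraN x hxa
    have e2 := h8 rb hrbN x hxb
    rw [hRra] at e1
    rw [hRrb] at e2
    exact hne (e1.symm.trans e2)
  have hsub : ∀ x, x ∈ cls ra ∪ cls rb → cls x = cls ra ∨ cls x = cls rb := by
    intro x hx
    rcases Finset.mem_union.mp hx with hx1 | hx1
    · exact Or.inl (h5 ra hraN x hx1)
    · exact Or.inr (h5 rb hrbN x hx1)
  have hclssub : ∀ x ∈ N, cls x ⊆ (if x ∈ cls ra ∪ cls rb then cls ra ∪ cls rb else cls x) := by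
    intro x hxN
    by_cases hx : x ∈ cls ra ∪ cls rb
    · rw [if_pos hx]
      rcases hsub x hx with he | he <;> rw [he]
      · exact Finset.subset_union_left
      · exact Finset.subset_union_right
    · rw [if_neg hx]
  have hmerged_of_mem : ∀ x ∈ N, ∀ b ∈ cls x, x ∈ cls ra ∪ cls rb → b ∈ cls ra ∪ cls rb := by
    intro x hxN b hb hx
    rcases hsub x hx with he | he
    · exact Finset.mem_union_left _ (he ▸ hb)
    · exact Finset.mem_union_right _ (he ▸ hb)
  have hnot_merged : ∀ x ∈ N, x ∉ cls ra ∪ cls rb → ∀ b ∈ cls x, b ∉ cls ra ∪ cls rb := by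
    intro x hxN hx b hb hbm
    have hbN : b ∈ N := h4 x hxN hb
    have hbc := h5 x hxN b hb
    rcases hsub b hbm with he | he
    · rw [he] at hbc
      exact hx (Finset.mem_union_left _ (by rw [hbc]; exact h3 x hxN))
    · rw [he] at hbc
      exact hx (Finset.mem_union_right _ (by rw [hbc]; exact h3 x hxN))
  -- new roots
  have hR' : ∀ a ∈ N, findRoot (fun x => if x = rb then ra else p x) f a =
      if findRoot p f a = rb then ra else findRoot p f a :=
    fun a ha => findRoot_reassign p d hd1 ra rb hra hrb hne f a (hdf a ha)
  refine ⟨h1, ?_, ?_, ?_, ?_, ?_, ?_, ?_, ?_, ?_⟩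
  · intro a haN
    try dsimp only at *
    have : a ≠ rb := fun he => haN (he ▸ hrbN)
    rw [if_neg this]
    exact h2 a haN
  · intro a ha
    try dsimp only at *
    by_cases hx : a ∈ cls ra ∪ cls rb
    · rw [if_pos hx]; exact hx
    · rw [if_neg hx]; exact h3 a ha
  · intro a ha
    try dsimp only at *
    by_cases hx : a ∈ cls ra ∪ cls rb
    · rw [if_pos hx]
      exact Finset.union_subset (h4 ra hraN) (h4 rb hrbN)
    · rw [if_neg hx]; exact h4 a ha
  · intro a ha b hb
    try dsimp only at *
    by_cases hx : a ∈ cls ra ∪ cls rb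
    · rw [if_pos hx] at hb
      rw [if_pos hx, if_pos hb]
    · rw [if_neg hx] at hb
      have hbm := hnot_merged a ha hx b hb
      rw [if_neg hx, if_neg hbm]
      exact h5 a ha b hb
  · intro a ha
    try dsimp only at *
    by_cases harb : a = rb
    · rw [if_pos harb]
      have : a ∈ cls ra ∪ cls rb := Finset.mem_union_right _ (harb ▸ h3 rb hrbN)
      rw [if_pos this]
      exact Finset.mem_union_left _ (h3 ra hraN)
    · rw [if_neg harb]
      exact hclssub a ha (h6 a ha)
  · intro a ha
    try dsimp only at *
    rw [hR' a ha]
    by_cases hrt : findRoot p f a = rb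
    · rw [if_pos hrt]
      have haM : a ∈ cls ra ∪ cls rb :=
        Finset.mem_union_right _ ((hRmem rb hrbN a ha hrb).mp hrt)
      rw [if_pos haM]
      exact Finset.mem_union_left _ (h3 ra hraN)
    · rw [if_neg hrt]
      exact hclssub a ha (h7 a ha)
  · intro a ha b hb
    try dsimp only at *
    by_cases hx : a ∈ cls ra ∪ cls rb
    · rw [if_pos hx] at hb
      have hbN : b ∈ N := Finset.union_subset (h4 ra hraN) (h4 rb hrbN) hb
      have hval : ∀ u ∈ N, u ∈ cls ra ∪ cls rb →
          findRoot (fun x => if x = rb then ra else p x) f u = ra := by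
        intro u huN hu
        rw [hR' u huN]
        rcases Finset.mem_union.mp hu with h1' | h1'
        · rw [(hRmem ra hraN u huN hra).mpr h1', if_neg hne]
        · rw [(hRmem rb hrbN u huN hrb).mpr h1', if_pos rfl]
      rw [hval b hbN hb, hval a ha hx]
    · rw [if_neg hx] at hb
      have hbm := hnot_merged a ha hx b hb
      have hbN : b ∈ N := h4 a ha hb
      rw [hR' a ha, hR' b hbN]
      have hRa : findRoot p f a ≠ rb :=
        fun he => hx (Finset.mem_union_right _ ((hRmem rb hrbN a ha hrb).mp he))
      have hRb : findRoot p f b ≠ rb :=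
        fun he => hbm (Finset.mem_union_right _ ((hRmem rb hrbN b hbN hrb).mp he))
      rw [if_neg hRa, if_neg hRb]
      exact h8 a ha b hb
  · intro a ha
    try dsimp only at *
    rw [hR' a ha]
    by_cases hrt : findRoot p f a = rb
    · rw [if_pos hrt, if_pos rfl]
      have haM : a ∈ cls ra ∪ cls rb :=
        Finset.mem_union_right _ ((hRmem rb hrbN a ha hrb).mp hrt)
      rw [if_pos haM, Finset.card_union_of_disjoint hdisj]
      have e1 := h9 ra hraN
      have e2 := h9 rb hrbN
      rw [hRra] at e1
      rw [hRrb] at e2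
      rw [e1, e2]
      push_cast
      ring
    · rw [if_neg hrt]
      by_cases hrta : findRoot p f a = ra
      · rw [hrta, if_pos rfl]
        have haM : a ∈ cls ra ∪ cls rb :=
          Finset.mem_union_left _ ((hRmem ra hraN a ha hra).mp hrta)
        rw [if_pos haM, Finset.card_union_of_disjoint hdisj]
        have e1 := h9 ra hraN
        have e2 := h9 rb hrbN
        rw [hRra] at e1
        rw [hRrb] at e2
        rw [e1, e2]
        push_cast
        ring
      · rw [if_neg hrta]
        have haM : a ∉ cls ra ∪ cls rb := by
          intro hm
          rcases Finset.mem_union.mp hm with h1' | h1'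
          · exact hrta ((hRmem ra hraN a ha hra).mpr h1')
          · exact hrt ((hRmem rb hrbN a ha hrb).mpr h1')
        rw [if_neg haM]
        exact h9 a ha
  · refine ⟨fun x => if x ∈ N ∧ findRoot p f x = rb then d x + (d ra + 1) else d x,
      ?_, ?_⟩
    · intro x hx
      dsimp only at hx ⊢
      by_cases hxrb : x = rb
      · rw [if_pos hxrb] at hx ⊢
        have hxN : x ∈ N := by rw [hxrb]; exact hrbN
        have hRx : findRoot p f x = rb := by rw [hxrb]; exact hRrb
        rw [if_neg (show ¬(ra ∈ N ∧ findRoot p f ra = rb) from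
            fun hh => hne (hRra.symm.trans hh.2)), if_pos ⟨hxN, hRx⟩]
        omega
      · rw [if_neg hxrb] at hx ⊢
        have hxN : x ∈ N := by
          by_contra hxN
          exact hx (h2 x hxN)
        have hpxN : p x ∈ N := h4 x hxN (h6 x hxN)
        have hchain : findRoot p f (p x) = findRoot p f x :=
          (findRoot_chain p d hd1 f x (hdf x hxN) hx).symm
        by_cases hrt : findRoot p f x = rb
        · rw [if_pos ⟨hpxN, hchain.trans hrt⟩, if_pos ⟨hxN, hrt⟩]
          have := hd1 x hx
          omega
        · rw [if_neg (fun hh => hrt (hchain.symm.trans hh.2)),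
            if_neg (fun hh => hrt hh.2)]
          exact hd1 x hx
    · intro a ha
      try dsimp only at *
      by_cases hrt : findRoot p f a = rb
      · rw [if_pos ⟨ha, hrt⟩]
        have haM : a ∈ cls rb := (hRmem rb hrbN a ha hrb).mp hrt
        have hm : a ∈ cls ra ∪ cls rb := Finset.mem_union_right _ haM
        rw [if_pos hm, Finset.card_union_of_disjoint hdisj]
        have hb1 : d a < (cls rb).card := by
          have := hd2 a ha
          rwa [h5 rb hrbN a haM] at this
        have hb2 : d ra < (cls ra).card := by
          have := hd2 ra hraN
          exact this
        omega
      · rw [if_neg (fun hh => hrt hh.2)]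
        calc d a < (cls a).card := hd2 a ha
          _ ≤ _ := Finset.card_le_card (hclssub a ha)

lemma ufUnion_inv (f : Nat) (N : Finset Int) (p s : Int → Int)
    (cls : Int → Finset Int) (h : UFInv f N p s cls) (a b : Int)
    (ha : a ∈ N) (hb : b ∈ N) :
    UFInv f N (ufUnion f (p, s) a b).1 (ufUnion f (p, s) a b).2
      (fun x => if x ∈ cls a ∪ cls b then cls a ∪ cls b else cls x) := by
  obtain ⟨h1, h2, h3, h4, h5, h6, h7, h8, h9, d, hd1, hd2⟩ := h
  have h' : UFInv f N p s cls := ⟨h1, h2, h3, h4, h5, h6, h7, h8, h9, d, hd1, hd2⟩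
  have hdf : ∀ x ∈ N, d x < f := fun x hx =>
    lt_of_lt_of_le (hd2 x hx) (le_trans (Finset.card_le_card (h4 x hx)) h1)
  have hfixa : p (findRoot p f a) = findRoot p f a :=
    (findRoot_stable p d hd1 f a (hdf a ha)).1
  have hfixb : p (findRoot p f b) = findRoot p f b :=
    (findRoot_stable p d hd1 f b (hdf b hb)).1
  have hra0N : findRoot p f a ∈ N := h4 a ha (h7 a ha)
  have hrb0N : findRoot p f b ∈ N := h4 b hb (h7 b hb)
  have hcls_a : cls (findRoot p f a) = cls a := h5 a ha _ (h7 a ha)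
  have hcls_b : cls (findRoot p f b) = cls b := h5 b hb _ (h7 b hb)
  by_cases heq : findRoot p f a = findRoot p f b
  · have hred : ufUnion f (p, s) a b = (p, s) := by
      simp [ufUnion, heq]
    rw [hred]
    have hab : cls a = cls b := by
      rw [← hcls_a, ← hcls_b, heq]
    refine UFInv_congr f N p s cls _ ?_ h'
    intro x hx
    dsimp only
    by_cases hm : x ∈ cls a ∪ cls b
    · rw [if_pos hm, ← hab, Finset.union_self]
      rcases Finset.mem_union.mp hm with hm1 | hm1
      · exact (h5 a ha x hm1).symm
      · rw [hab]
        exact (h5 b hb x hm1).symm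
    · rw [if_neg hm]
  · by_cases hsz : s (findRoot p f a) < s (findRoot p f b)
    · have hred : ufUnion f (p, s) a b =
          ((fun x => if x = findRoot p f a then findRoot p f b else p x),
           (fun x => if x = findRoot p f b then
              s (findRoot p f b) + s (findRoot p f a) else s x)) := by
        simp [ufUnion, heq, hsz]
      rw [hred]
      have hatt := uf_attach_inv f N p s cls h' (findRoot p f b) (findRoot p f a)
        hrb0N hra0N hfixb hfixa (fun he => heq he.symm)
      refine UFInv_congr f N _ _ _ _ ?_ hatt
      intro x _
      dsimp only
      rw [hcls_a, hcls_b, Finset.union_comm (cls b) (cls a)]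
    · have hred : ufUnion f (p, s) a b =
          ((fun x => if x = findRoot p f b then findRoot p f a else p x),
           (fun x => if x = findRoot p f a then
              s (findRoot p f a) + s (findRoot p f b) else s x)) := by
        simp [ufUnion, heq, hsz]
      rw [hred]
      have hatt := uf_attach_inv f N p s cls h' (findRoot p f a) (findRoot p f b)
        hra0N hrb0N hfixa hfixb heq
      refine UFInv_congr f N _ _ _ _ ?_ hatt
      intro x _
      dsimp only
      rw [hcls_a, hcls_b]

-- ---------- linking the union-find partition to grid connectivity ----------

-- the node set: flattened indices of the grid cells
def pvN (c r : Int) : Finset Int := (pvGrid r c).image (fun v => v.1 * c + v.2)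

lemma pvEnc_injOn (c r : Int) : ∀ u ∈ pvGrid r c, ∀ v ∈ pvGrid r c,
    u.1 * c + u.2 = v.1 * c + v.2 → u = v := by
  intro u hu v hv h
  rw [mem_pvGrid] at hu hv
  have h1 : u.1 = v.1 := by
    by_contra hne
    rcases lt_or_gt_of_ne hne with hlt | hlt
    · have hmul : (u.1 + 1) * c ≤ v.1 * c :=
        mul_le_mul_of_nonneg_right (by omega) (by omega)
      rw [add_mul, one_mul] at hmul
      linarith [hu.2.2.1, hu.2.2.2, hv.2.2.1, hv.2.2.2]
    · have hmul : (v.1 + 1) * c ≤ u.1 * c :=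
        mul_le_mul_of_nonneg_right (by omega) (by omega)
      rw [add_mul, one_mul] at hmul
      linarith [hu.2.2.1, hu.2.2.2, hv.2.2.1, hv.2.2.2]
  have h2 : u.2 = v.2 := by
    rw [h1] at h
    exact add_left_cancel h
  exact Prod.ext h1 h2

lemma mem_pvN (c r : Int) (v : Int × Int) (hv : v ∈ pvGrid r c) :
    v.1 * c + v.2 ∈ pvN c r := Finset.mem_image_of_mem _ hv

lemma card_pvN (c r : Int) : (pvN c r).card = r.toNat * c.toNat := by
  rw [pvN, Finset.card_image_of_injOn (fun u hu v hv h => pvEnc_injOn c r u hu v hv h),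
    card_pvGrid]

-- processed-edge relation: cell p has been scanned and q is its right or down oil neighbour
def pvEIn (land : List (List Int)) (r c : Int) (L : List (Int × Int))
    (p q : Int × Int) : Prop :=
  p ∈ L ∧ pvGood land r c p ∧ pvGood land r c q ∧
    (q = (p.1, p.2 + 1) ∨ q = (p.1 + 1, p.2))

lemma eqvGen_congr {α : Type} (E E' : α → α → Prop) (h : ∀ x y, E x y ↔ E' x y)
    (x y : α) : Relation.EqvGen E x y ↔ Relation.EqvGen E' x y :=
  ⟨Relation.EqvGen.mono (fun a b hab => (h a b).mp hab),
   Relation.EqvGen.mono (fun a b hab => (h a b).mpr hab)⟩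

lemma eqvGen_bot {α : Type} (E : α → α → Prop) (hE : ∀ x y, ¬ E x y) (x y : α) :
    Relation.EqvGen E x y ↔ x = y := by
  constructor
  · intro h
    induction h with
    | rel a b hab => exact absurd hab (hE a b)
    | refl a => rfl
    | symm a b _ ih => exact ih.symm
    | trans a b c _ _ ih1 ih2 => exact ih1.trans ih2
  · rintro rfl
    exact Relation.EqvGen.refl x

lemma eqvGen_add_edge {α : Type} (E : α → α → Prop) (x0 y0 v w : α) :
    Relation.EqvGen (fun p q => E p q ∨ (p = x0 ∧ q = y0)) v w ↔
      (Relation.EqvGen E v w ∨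
        ((Relation.EqvGen E v x0 ∨ Relation.EqvGen E v y0) ∧
         (Relation.EqvGen E w x0 ∨ Relation.EqvGen E w y0))) := by
  constructor
  · intro h
    induction h with
    | rel a b hab =>
      rcases hab with hE | ⟨rfl, rfl⟩
      · exact Or.inl (Relation.EqvGen.rel _ _ hE)
      · exact Or.inr ⟨Or.inl (Relation.EqvGen.refl _), Or.inr (Relation.EqvGen.refl _)⟩
    | refl a => exact Or.inl (Relation.EqvGen.refl a)
    | symm a b _ ih =>
      rcases ih with h1 | ⟨h1, h2⟩
      · exact Or.inl (Relation.EqvGen.symm _ _ h1)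
      · exact Or.inr ⟨h2, h1⟩
    | trans a b c _ _ ih1 ih2 =>
      rcases ih1 with h1 | ⟨h1, h2⟩
      · rcases ih2 with h3 | ⟨h3, h4⟩
        · exact Or.inl (Relation.EqvGen.trans _ _ _ h1 h3)
        · refine Or.inr ⟨?_, h4⟩
          rcases h3 with h3 | h3
          · exact Or.inl (Relation.EqvGen.trans _ _ _ h1 h3)
          · exact Or.inr (Relation.EqvGen.trans _ _ _ h1 h3)
      · rcases ih2 with h3 | ⟨h3, h4⟩
        · refine Or.inr ⟨h1, ?_⟩
          rcases h2 with h2 | h2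
          · exact Or.inl (Relation.EqvGen.trans _ _ _ (Relation.EqvGen.symm _ _ h3) h2)
          · exact Or.inr (Relation.EqvGen.trans _ _ _ (Relation.EqvGen.symm _ _ h3) h2)
        · exact Or.inr ⟨h1, h4⟩
  · have hlift : ∀ a b, Relation.EqvGen E a b →
        Relation.EqvGen (fun p q => E p q ∨ (p = x0 ∧ q = y0)) a b :=
      fun a b h => Relation.EqvGen.mono (fun p q hpq => Or.inl hpq) h
    have hedge : Relation.EqvGen (fun p q => E p q ∨ (p = x0 ∧ q = y0)) x0 y0 :=
      Relation.EqvGen.rel _ _ (Or.inr ⟨rfl, rfl⟩)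
    rintro (h | ⟨h1, h2⟩)
    · exact hlift _ _ h
    · have hv0 : Relation.EqvGen (fun p q => E p q ∨ (p = x0 ∧ q = y0)) v x0 := by
        rcases h1 with h1 | h1
        · exact hlift _ _ h1
        · exact Relation.EqvGen.trans _ _ _ (hlift _ _ h1)
            (Relation.EqvGen.symm _ _ hedge)
      have hw0 : Relation.EqvGen (fun p q => E p q ∨ (p = x0 ∧ q = y0)) w x0 := by
        rcases h2 with h2 | h2
        · exact hlift _ _ h2
        · exact Relation.EqvGen.trans _ _ _ (hlift _ _ h2)
            (Relation.EqvGen.symm _ _ hedge)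
      exact Relation.EqvGen.trans _ _ _ hv0 (Relation.EqvGen.symm _ _ hw0)

-- the scan invariant: some partition cls matches the equivalence closure of processed edges
def ScanInv (land : List (List Int)) (r c : Int) (f : Nat) (L : List (Int × Int))
    (uf : (Int → Int) × (Int → Int)) : Prop :=
  ∃ cls : Int → Finset Int,
    UFInv f (pvN c r) uf.1 uf.2 cls ∧
    ∀ v ∈ pvGrid r c, ∀ w ∈ pvGrid r c,
      (w.1 * c + w.2 ∈ cls (v.1 * c + v.2) ↔
        Relation.EqvGen (pvEIn land r c L) v w)

lemma ScanInv_union_edge (land : List (List Int)) (r c : Int) (f : Nat)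
    (uf : (Int → Int) × (Int → Int)) (E : (Int × Int) → (Int × Int) → Prop)
    (x0 y0 : Int × Int) (hx0 : x0 ∈ pvGrid r c) (hy0 : y0 ∈ pvGrid r c)
    (cls : Int → Finset Int) (hUF : UFInv f (pvN c r) uf.1 uf.2 cls)
    (hM : ∀ v ∈ pvGrid r c, ∀ w ∈ pvGrid r c,
      (w.1 * c + w.2 ∈ cls (v.1 * c + v.2) ↔ Relation.EqvGen E v w)) :
    ∃ cls' : Int → Finset Int,
      UFInv f (pvN c r)
        (ufUnion f uf (x0.1 * c + x0.2) (y0.1 * c + y0.2)).1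
        (ufUnion f uf (x0.1 * c + x0.2) (y0.1 * c + y0.2)).2 cls' ∧
      ∀ v ∈ pvGrid r c, ∀ w ∈ pvGrid r c,
        (w.1 * c + w.2 ∈ cls' (v.1 * c + v.2) ↔
          Relation.EqvGen (fun p q => E p q ∨ (p = x0 ∧ q = y0)) v w) := by
  have hx0N : x0.1 * c + x0.2 ∈ pvN c r := mem_pvN c r x0 hx0
  have hy0N : y0.1 * c + y0.2 ∈ pvN c r := mem_pvN c r y0 hy0
  have hUF' := ufUnion_inv f (pvN c r) uf.1 uf.2 cls hUF
    (x0.1 * c + x0.2) (y0.1 * c + y0.2) hx0N hy0N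
  obtain ⟨h1, h2, h3, h4, h5, h6, h7, h8, h9, hd⟩ := hUF
  refine ⟨_, hUF', ?_⟩
  have hMmem : ∀ u ∈ pvGrid r c,
      (u.1 * c + u.2 ∈ cls (x0.1 * c + x0.2) ∪ cls (y0.1 * c + y0.2) ↔
        (Relation.EqvGen E x0 u ∨ Relation.EqvGen E y0 u)) := by
    intro u hu
    rw [Finset.mem_union, hM x0 hx0 u hu, hM y0 hy0 u hu]
  intro v hv w hw
  try dsimp only
  rw [eqvGen_add_edge]
  by_cases hvM : v.1 * c + v.2 ∈ cls (x0.1 * c + x0.2) ∪ cls (y0.1 * c + y0.2)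
  · rw [if_pos hvM]
    have hsubM : cls (v.1 * c + v.2) ⊆
        cls (x0.1 * c + x0.2) ∪ cls (y0.1 * c + y0.2) := by
      rcases Finset.mem_union.mp hvM with hm | hm
      · rw [h5 _ hx0N _ hm]
        exact Finset.subset_union_left
      · rw [h5 _ hy0N _ hm]
        exact Finset.subset_union_right
    have hvQ := (hMmem v hv).mp hvM
    constructor
    · intro hwM
      refine Or.inr ⟨?_, ?_⟩
      · rcases hvQ with h' | h'
        · exact Or.inl (Relation.EqvGen.symm _ _ h')
        · exact Or.inr (Relation.EqvGen.symm _ _ h')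
      · rcases (hMmem w hw).mp hwM with h' | h'
        · exact Or.inl (Relation.EqvGen.symm _ _ h')
        · exact Or.inr (Relation.EqvGen.symm _ _ h')
    · rintro (hQ | ⟨_, hwQ⟩)
      · exact hsubM ((hM v hv w hw).mpr hQ)
      · refine (hMmem w hw).mpr ?_
        rcases hwQ with h' | h'
        · exact Or.inl (Relation.EqvGen.symm _ _ h')
        · exact Or.inr (Relation.EqvGen.symm _ _ h')
  · rw [if_neg hvM]
    rw [hM v hv w hw]
    constructor
    · exact Or.inl
    · rintro (hQ | ⟨hvQ, _⟩)
      · exact hQ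
      · exfalso
        refine hvM ((hMmem v hv).mpr ?_)
        rcases hvQ with h' | h'
        · exact Or.inl (Relation.EqvGen.symm _ _ h')
        · exact Or.inr (Relation.EqvGen.symm _ _ h')

lemma ScanInv_step (land : List (List Int)) (r c : Int) (f : Nat)
    (L : List (Int × Int)) (uf : (Int → Int) × (Int → Int)) (v : Int × Int)
    (hv : v ∈ pvGrid r c) (h : ScanInv land r c f L uf) :
    ScanInv land r c f (L ++ [v]) (ufScan land r c f uf v) := by
  obtain ⟨cls, hUF, hM⟩ := h
  have hvb := (mem_pvGrid r c v).mp hv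
  by_cases hland : landAt land v.1 v.2 = 0
  · have hred : ufScan land r c f uf v = uf := by
      simp [ufScan, hland]
    rw [hred]
    refine ⟨cls, hUF, ?_⟩
    intro a ha b hb
    rw [hM a ha b hb]
    refine eqvGen_congr _ _ ?_ a b
    intro p q
    unfold pvEIn
    constructor
    · rintro ⟨hp, h2', h3', h4'⟩
      exact ⟨List.mem_append.mpr (Or.inl hp), h2', h3', h4'⟩
    · rintro ⟨hp, h2', h3', h4'⟩
      rcases List.mem_append.mp hp with hp1 | hp1
      · exact ⟨hp1, h2', h3', h4'⟩
      · rw [List.mem_singleton] at hp1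
        subst hp1
        exact absurd hland h2'.2.2.2.2
  · have hgoodv : pvGood land r c v := ⟨hvb.1, hvb.2.1, hvb.2.2.1, hvb.2.2.2, hland⟩
    -- pointwise description of the processed edges after scanning v
    have hE' : ∀ p q, pvEIn land r c (L ++ [v]) p q ↔
        (pvEIn land r c L p q ∨
          (p = v ∧ q = (v.1, v.2 + 1) ∧ pvGood land r c (v.1, v.2 + 1)) ∨
          (p = v ∧ q = (v.1 + 1, v.2) ∧ pvGood land r c (v.1 + 1, v.2))) := by
      intro p q
      unfold pvEIn
      constructor
      · rintro ⟨hp, h2', h3', h4'⟩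
        rcases List.mem_append.mp hp with hp1 | hp1
        · exact Or.inl ⟨hp1, h2', h3', h4'⟩
        · rw [List.mem_singleton] at hp1
          subst hp1
          rcases h4' with h4' | h4'
          · exact Or.inr (Or.inl ⟨rfl, h4', h4' ▸ h3'⟩)
          · exact Or.inr (Or.inr ⟨rfl, h4', h4' ▸ h3'⟩)
      · rintro (⟨hp, h2', h3', h4'⟩ | ⟨rfl, rfl, hg⟩ | ⟨rfl, rfl, hg⟩)
        · exact ⟨List.mem_append.mpr (Or.inl hp), h2', h3', h4'⟩
        · exact ⟨List.mem_append.mpr (Or.inr (List.mem_singleton.mpr rfl)),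
            hgoodv, hg, Or.inl rfl⟩
        · exact ⟨List.mem_append.mpr (Or.inr (List.mem_singleton.mpr rfl)),
            hgoodv, hg, Or.inr rfl⟩
    have hgr : (v.2 + 1 < c ∧ landAt land v.1 (v.2 + 1) ≠ 0) ↔
        pvGood land r c (v.1, v.2 + 1) := by
      unfold pvGood
      constructor
      · rintro ⟨hc1, hc2⟩
        exact ⟨hvb.1, hvb.2.1, by omega, hc1, hc2⟩
      · rintro ⟨_, _, _, hc1, hc2⟩
        exact ⟨hc1, hc2⟩
    have hgd : (v.1 + 1 < r ∧ landAt land (v.1 + 1) v.2 ≠ 0) ↔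
        pvGood land r c (v.1 + 1, v.2) := by
      unfold pvGood
      constructor
      · rintro ⟨hc1, hc2⟩
        exact ⟨by omega, hc1, hvb.2.2.1, hvb.2.2.2, hc2⟩
      · rintro ⟨_, hc1, _, _, hc2⟩
        exact ⟨hc1, hc2⟩
    by_cases hg1 : v.2 + 1 < c ∧ landAt land v.1 (v.2 + 1) ≠ 0
    · have hrvg : (v.1, v.2 + 1) ∈ pvGrid r c := by
        rw [mem_pvGrid]
        exact ⟨hvb.1, hvb.2.1, by omega, hg1.1⟩
      obtain ⟨cls1, hUF1, hM1⟩ := ScanInv_union_edge land r c f uf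
        (pvEIn land r c L) v (v.1, v.2 + 1) hv hrvg cls hUF hM
      dsimp only at hUF1 hM1
      have e1 : v.1 * c + (v.2 + 1) = v.1 * c + v.2 + 1 := by ring
      rw [e1] at hUF1
      by_cases hg2 : v.1 + 1 < r ∧ landAt land (v.1 + 1) v.2 ≠ 0
      · have hdvg : (v.1 + 1, v.2) ∈ pvGrid r c := by
          rw [mem_pvGrid]
          exact ⟨by omega, hg2.1, hvb.2.2.1, hvb.2.2.2⟩
        obtain ⟨cls2, hUF2, hM2⟩ := ScanInv_union_edge land r c f
          (ufUnion f uf (v.1 * c + v.2) (v.1 * c + v.2 + 1))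
          (fun p q => pvEIn land r c L p q ∨ (p = v ∧ q = (v.1, v.2 + 1)))
          v (v.1 + 1, v.2) hv hdvg cls1 hUF1 hM1
        dsimp only at hUF2 hM2
        have hred : ufScan land r c f uf v =
            ufUnion f (ufUnion f uf (v.1 * c + v.2) (v.1 * c + v.2 + 1))
              (v.1 * c + v.2) ((v.1 + 1) * c + v.2) := by
          simp [ufScan, hland, hg1, hg2]
        rw [hred]
        refine ⟨cls2, hUF2, ?_⟩
        intro a ha b hb
        rw [hM2 a ha b hb]
        refine eqvGen_congr _ _ ?_ a b
        intro p q
        rw [hE' p q]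
        constructor
        · rintro ((hE | ⟨hp, hq⟩) | ⟨hp, hq⟩)
          · exact Or.inl hE
          · exact Or.inr (Or.inl ⟨hp, hq, (hgr.mp hg1)⟩)
          · exact Or.inr (Or.inr ⟨hp, hq, (hgd.mp hg2)⟩)
        · rintro (hE | ⟨hp, hq, _⟩ | ⟨hp, hq, _⟩)
          · exact Or.inl (Or.inl hE)
          · exact Or.inl (Or.inr ⟨hp, hq⟩)
          · exact Or.inr ⟨hp, hq⟩
      · have hred : ufScan land r c f uf v =
            ufUnion f uf (v.1 * c + v.2) (v.1 * c + v.2 + 1) := by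
          simp [ufScan, hland, hg1, hg2]
        rw [hred]
        refine ⟨cls1, hUF1, ?_⟩
        intro a ha b hb
        rw [hM1 a ha b hb]
        refine eqvGen_congr _ _ ?_ a b
        intro p q
        rw [hE' p q]
        constructor
        · rintro (hE | ⟨hp, hq⟩)
          · exact Or.inl hE
          · exact Or.inr (Or.inl ⟨hp, hq, (hgr.mp hg1)⟩)
        · rintro (hE | ⟨hp, hq, _⟩ | ⟨hp, hq, hgdv⟩)
          · exact Or.inl hE
          · exact Or.inr ⟨hp, hq⟩
          · exact absurd (hgd.mpr hgdv) hg2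
    · by_cases hg2 : v.1 + 1 < r ∧ landAt land (v.1 + 1) v.2 ≠ 0
      · have hdvg : (v.1 + 1, v.2) ∈ pvGrid r c := by
          rw [mem_pvGrid]
          exact ⟨by omega, hg2.1, hvb.2.2.1, hvb.2.2.2⟩
        obtain ⟨cls1, hUF1, hM1⟩ := ScanInv_union_edge land r c f uf
          (pvEIn land r c L) v (v.1 + 1, v.2) hv hdvg cls hUF hM
        dsimp only at hUF1 hM1
        have hred : ufScan land r c f uf v =
            ufUnion f uf (v.1 * c + v.2) ((v.1 + 1) * c + v.2) := by
          simp [ufScan, hland, hg1, hg2]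
        rw [hred]
        refine ⟨cls1, hUF1, ?_⟩
        intro a ha b hb
        rw [hM1 a ha b hb]
        refine eqvGen_congr _ _ ?_ a b
        intro p q
        rw [hE' p q]
        constructor
        · rintro (hE | ⟨hp, hq⟩)
          · exact Or.inl hE
          · exact Or.inr (Or.inr ⟨hp, hq, (hgd.mp hg2)⟩)
        · rintro (hE | ⟨hp, hq, hgrv⟩ | ⟨hp, hq, _⟩)
          · exact Or.inl hE
          · exact absurd (hgr.mpr hgrv) hg1
          · exact Or.inr ⟨hp, hq⟩
      · have hred : ufScan land r c f uf v = uf := by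
          simp [ufScan, hland, hg1, hg2]
        rw [hred]
        refine ⟨cls, hUF, ?_⟩
        intro a ha b hb
        rw [hM a ha b hb]
        refine eqvGen_congr _ _ ?_ a b
        intro p q
        rw [hE' p q]
        constructor
        · exact Or.inl
        · rintro (hE | ⟨hp, hq, hgrv⟩ | ⟨hp, hq, hgdv⟩)
          · exact hE
          · exact absurd (hgr.mpr hgrv) hg1
          · exact absurd (hgd.mpr hgdv) hg2

lemma ScanInv_fold (land : List (List Int)) (r c : Int) (f : Nat)
    (cells : List (Int × Int)) (hcells : ∀ v ∈ cells, v ∈ pvGrid r c)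
    (L : List (Int × Int)) (uf : (Int → Int) × (Int → Int))
    (h : ScanInv land r c f L uf) :
    ScanInv land r c f (L ++ cells) (cells.foldl (ufScan land r c f) uf) := by
  induction cells generalizing L uf with
  | nil => simpa using h
  | cons v cells ih =>
    simp only [List.foldl_cons]
    have := ih (fun w hw => hcells w (List.mem_cons_of_mem _ hw)) (L ++ [v]) _
      (ScanInv_step land r c f L uf v (hcells v List.mem_cons_self) h)
    simpa using this

lemma ScanInv_init (land : List (List Int)) (r c : Int) (f : Nat)
    (hf : (pvN c r).card ≤ f) :
    ScanInv land r c f [] ((fun x => x), fun _ => 1) := by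
  refine ⟨fun x => {x}, UFInv_init f (pvN c r) hf, ?_⟩
  intro v hv w hw
  rw [Finset.mem_singleton,
    eqvGen_bot (pvEIn land r c []) (by rintro x y ⟨hx, -⟩; exact List.not_mem_nil hx) v w]
  constructor
  · intro h
    exact (pvEnc_injOn c r w hw v hv h) ▸ rfl
  · rintro rfl
    rfl

-- after the whole scan, the processed edges connect exactly what pvReach connects
lemma eqvGen_reach (land : List (List Int)) (r c : Int) (v w : Int × Int) :
    Relation.EqvGen (pvEIn land r c (pvGridList r c)) v w ↔ pvReach land r c v w := by
  constructor
  · intro h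
    induction h with
    | rel a b hab =>
      refine Relation.ReflTransGen.single ⟨hab.2.1, hab.2.2.1, ?_⟩
      rcases hab.2.2.2 with he | he
      · subst he
        exact Or.inl ⟨rfl, Or.inr rfl⟩
      · subst he
        exact Or.inr ⟨rfl, Or.inr rfl⟩
    | refl a => exact Relation.ReflTransGen.refl
    | symm a b _ ih => exact pvReach_symm land r c a b ih
    | trans a b c' _ _ ih1 ih2 => exact pvReach_trans land r c a b c' ih1 ih2
  · intro h
    induction h with
    | refl => exact Relation.EqvGen.refl v
    | tail hst hadj ih =>
      rename_i b u
      refine Relation.EqvGen.trans _ _ _ ih ?_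
      have hgb : pvGood land r c b := hadj.1
      have hgu : pvGood land r c u := hadj.2.1
      have hmb : b ∈ pvGridList r c := by
        rw [mem_pvGridList]
        exact ⟨hgb.1, hgb.2.1, hgb.2.2.1, hgb.2.2.2.1⟩
      have hmu : u ∈ pvGridList r c := by
        rw [mem_pvGridList]
        exact ⟨hgu.1, hgu.2.1, hgu.2.2.1, hgu.2.2.2.1⟩
      rcases hadj.2.2 with ⟨h1, h2 | h2⟩ | ⟨h1, h2 | h2⟩
      · -- b.2 = u.2 + 1 : u is the left neighbour, edge u → b
        refine Relation.EqvGen.symm _ _ (Relation.EqvGen.rel _ _ ?_)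
        exact ⟨hmu, hgu, hgb, Or.inl (by
          rcases b with ⟨b1, b2⟩; rcases u with ⟨u1, u2⟩
          simp at h1 h2 ⊢
          omega)⟩
      · refine Relation.EqvGen.rel _ _ ?_
        exact ⟨hmb, hgb, hgu, Or.inl (by
          rcases b with ⟨b1, b2⟩; rcases u with ⟨u1, u2⟩
          simp at h1 h2 ⊢
          omega)⟩
      · refine Relation.EqvGen.symm _ _ (Relation.EqvGen.rel _ _ ?_)
        exact ⟨hmu, hgu, hgb, Or.inr (by
          rcases b with ⟨b1, b2⟩; rcases u with ⟨u1, u2⟩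
          simp at h1 h2 ⊢
          omega)⟩
      · refine Relation.EqvGen.rel _ _ ?_
        exact ⟨hmb, hgb, hgu, Or.inr (by
          rcases b with ⟨b1, b2⟩; rcases u with ⟨u1, u2⟩
          simp at h1 h2 ⊢
          omega)⟩

-- ---------- the column sums ----------

lemma colRootsB_spec (land : List (List Int)) (r c : Int) (n : Nat) (p : Int → Int)
    (j : Int) :
    (colRootsB land r c n p j).Nodup ∧
    ∀ t, t ∈ colRootsB land r c n p j ↔
      ∃ i, 0 ≤ i ∧ i < r ∧ landAt land i j ≠ 0 ∧ findRoot p n (i * c + j) = t := by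
  have hgen : ∀ (l : List Int) (s0 : PySem.Set Int), s0.Nodup →
      (l.foldl (fun s i => if landAt land i j ≠ 0
          then PySem.Set.add s (findRoot p n (i * c + j)) else s) s0).Nodup ∧
      ∀ t, t ∈ l.foldl (fun s i => if landAt land i j ≠ 0
          then PySem.Set.add s (findRoot p n (i * c + j)) else s) s0 ↔
        t ∈ s0 ∨ ∃ i ∈ l, landAt land i j ≠ 0 ∧ findRoot p n (i * c + j) = t := by
    intro l
    induction l with
    | nil => intro s0 hs0; exact ⟨hs0, by simp⟩
    | cons i l ih =>
      intro s0 hs0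
      simp only [List.foldl_cons]
      by_cases hc' : landAt land i j ≠ 0
      · rw [if_pos hc']
        obtain ⟨hn, hm⟩ := ih (PySem.Set.add s0 (findRoot p n (i * c + j)))
          (PySem.Set.nodup_add s0 _ hs0)
        refine ⟨hn, fun t => ?_⟩
        rw [hm t, PySem.Set.mem_add]
        constructor
        · rintro ((h | h) | h)
          · exact Or.inl h
          · exact Or.inr ⟨i, List.mem_cons_self, hc', h.symm⟩
          · obtain ⟨i', hi', h1, h2⟩ := h
            exact Or.inr ⟨i', List.mem_cons_of_mem _ hi', h1, h2⟩
        · rintro (h | ⟨i', hi', h1, h2⟩)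
          · exact Or.inl (Or.inl h)
          · rcases List.mem_cons.mp hi' with rfl | hi''
            · exact Or.inl (Or.inr h2.symm)
            · exact Or.inr ⟨i', hi'', h1, h2⟩
      · rw [if_neg hc']
        obtain ⟨hn, hm⟩ := ih s0 hs0
        refine ⟨hn, fun t => ?_⟩
        rw [hm t]
        constructor
        · rintro (h | ⟨i', hi', h1, h2⟩)
          · exact Or.inl h
          · exact Or.inr ⟨i', List.mem_cons_of_mem _ hi', h1, h2⟩
        · rintro (h | ⟨i', hi', h1, h2⟩)
          · exact Or.inl h
          · rcases List.mem_cons.mp hi' with rfl | hi''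
            · exact absurd h1 hc'
            · exact Or.inr ⟨i', hi'', h1, h2⟩
  obtain ⟨hn, hm⟩ := hgen (PySem.List.pyRange 0 r 1) PySem.Set.empty List.nodup_nil
  refine ⟨hn, fun t => ?_⟩
  rw [colRootsB, hm t]
  constructor
  · rintro (h | ⟨i, hi, h1, h2⟩)
    · exact absurd h (List.not_mem_nil)
    · rw [PySem.List.mem_pyRange_one] at hi
      exact ⟨i, hi.1, hi.2, h1, h2⟩
  · rintro ⟨i, h0, h1, h2, h3⟩
    exact Or.inr ⟨i, PySem.List.mem_pyRange_one.mpr ⟨h0, h1⟩, h2, h3⟩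

lemma headD_mem_finset (s : Finset (Int × Int)) (hs : s.Nonempty) :
    s.toList.headD (0, 0) ∈ s := by
  have hl : s.toList ≠ [] := by
    intro he
    rw [Finset.toList_eq_nil] at he
    exact hs.ne_empty he
  cases hl' : s.toList with
  | nil => exact absurd hl' hl
  | cons a l =>
    have : a ∈ s.toList := by rw [hl']; exact List.mem_cons_self
    simpa using Finset.mem_toList.mp this

-- ===== VERDICT (by name: the statement is the Claim_ definition above) =====
theorem solution_spec : Claim_equal_solution := by
  intro land _ _
  unfold Spec_solution
  simp only [solution, solution_alt]
  rw [foldl_grid (PySem.List.len land) (PySem.List.len (PySem.List.pyGetD land 0 []))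
      (cellA land (PySem.List.len land) (PySem.List.len (PySem.List.pyGetD land 0 []))),
    foldl_grid (PySem.List.len land) (PySem.List.len (PySem.List.pyGetD land 0 []))
      (ufScan land (PySem.List.len land) (PySem.List.len (PySem.List.pyGetD land 0 []))
        ((PySem.List.len land * PySem.List.len (PySem.List.pyGetD land 0 [])).toNat))]
  set R := PySem.List.len land with hR
  set C := PySem.List.len (PySem.List.pyGetD land 0 []) with hC
  set n := (R * C).toNat with hn
  set stA := (pvGridList R C).foldl (cellA land R C)
    ((fun _ => (-1 : Int)), (fun _ => (0 : Int)), (1 : Int)) with hstA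
  set uf := (pvGridList R C).foldl (ufScan land R C n)
    ((fun x => x), fun _ => (1 : Int)) with huf
  have hR0 : 0 ≤ R := by rw [hR]; simp
  have hC0 : 0 ≤ C := by rw [hC]; simp
  have hcard : (pvN C R).card ≤ n := by
    rw [card_pvN, hn]
    obtain ⟨a, ha⟩ := Int.eq_ofNat_of_zero_le hR0
    obtain ⟨b, hb⟩ := Int.eq_ofNat_of_zero_le hC0
    rw [ha, hb, ← Nat.cast_mul, Int.toNat_natCast, Int.toNat_natCast, Int.toNat_natCast]
  -- A's final state
  have hA := pvInvA_fold land R C (pvGridList R C)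
    (fun v hv => (mem_pvGridList R C v).mp hv) []
    (fun _ => -1) (fun _ => 0) 1 (pvInvA_init land R C)
  rw [← hstA] at hA
  simp only [List.nil_append] at hA
  obtain ⟨Cs, c1, c2, c3, c4, c5, c6, c7⟩ := hA
  -- B's final state
  have hB := ScanInv_fold land R C n (pvGridList R C)
    (fun v hv => (mem_pvGrid R C v).mpr ((mem_pvGridList R C v).mp hv))
    [] ((fun x => x), fun _ => 1) (ScanInv_init land R C n hcard)
  rw [← huf] at hB
  simp only [List.nil_append] at hB
  obtain ⟨cls, hUF, hMatch⟩ := hB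
  obtain ⟨u1, u2, u3, u4, u5, u6, u7, u8, u9, ud⟩ := hUF
  have hlink : ∀ v ∈ pvGrid R C, ∀ w ∈ pvGrid R C,
      (w.1 * C + w.2 ∈ cls (v.1 * C + v.2) ↔ pvReach land R C v w) := by
    intro v hv w hw
    rw [hMatch v hv w hw, eqvGen_reach]
  have hgood_grid : ∀ u, pvGood land R C u → u ∈ pvGrid R C := fun u hu =>
    (mem_pvGrid R C u).mpr ⟨hu.1, hu.2.1, hu.2.2.1, hu.2.2.2.1⟩
  have hmemcls_k : ∀ k, k < Cs.length → ∀ u ∈ Cs.getD k ∅, pvGood land R C u := by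
    intro k hk u hu
    apply c6
    rw [c3 k hk u hu]
    omega
  have hclassgrid : ∀ k, k < Cs.length → ∀ u ∈ Cs.getD k ∅, u ∈ pvGrid R C :=
    fun k hk u hu => hgood_grid u (hmemcls_k k hk u hu)
  have hclsimg : ∀ k, k < Cs.length → ∀ u ∈ Cs.getD k ∅,
      cls (u.1 * C + u.2) = (Cs.getD k ∅).image (fun w => w.1 * C + w.2) := by
    intro k hk u hu
    have hug := hclassgrid k hk u hu
    ext x
    constructor
    · intro hx
      have hxN : x ∈ pvN C R := u4 _ (mem_pvN C R u hug) hx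
      obtain ⟨w, hw, rfl⟩ := Finset.mem_image.mp hxN
      have hreach : pvReach land R C u w := (hlink u hug w hw).mp hx
      exact Finset.mem_image_of_mem _ ((c5 k hk u hu w).mpr hreach)
    · intro hx
      obtain ⟨w, hw, rfl⟩ := Finset.mem_image.mp hx
      exact (hlink u hug w (hclassgrid k hk w hw)).mpr ((c5 k hk u hu w).mp hw)
  have hsameroot : ∀ k, k < Cs.length → ∀ u ∈ Cs.getD k ∅, ∀ w ∈ Cs.getD k ∅,
      findRoot uf.1 n (w.1 * C + w.2) = findRoot uf.1 n (u.1 * C + u.2) := by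
    intro k hk u hu w hw
    have hug := hclassgrid k hk u hu
    have hwg := hclassgrid k hk w hw
    refine u8 _ (mem_pvN C R u hug) _ ?_
    exact (hlink u hug w hwg).mpr ((c5 k hk u hu w).mp hw)
  have hsize : ∀ k, k < Cs.length → ∀ u ∈ Cs.getD k ∅,
      uf.2 (findRoot uf.1 n (u.1 * C + u.2)) = ((Cs.getD k ∅).card : Int) := by
    intro k hk u hu
    have hug := hclassgrid k hk u hu
    rw [u9 _ (mem_pvN C R u hug), hclsimg k hk u hu,
      Finset.card_image_of_injOn (fun a haa b hbb hab =>
        pvEnc_injOn C R a (hclassgrid k hk a haa) b (hclassgrid k hk b hbb) hab)]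
  have hrootinj : ∀ k1, k1 < Cs.length → ∀ a ∈ Cs.getD k1 ∅,
      ∀ k2, k2 < Cs.length → ∀ b ∈ Cs.getD k2 ∅,
      findRoot uf.1 n (a.1 * C + a.2) = findRoot uf.1 n (b.1 * C + b.2) → k1 = k2 := by
    intro k1 hk1 a ha' k2 hk2 b hb' hroot
    have hag := hclassgrid k1 hk1 a ha'
    have hbg := hclassgrid k2 hk2 b hb'
    have haN := mem_pvN C R a hag
    have hbN := mem_pvN C R b hbg
    have h7a := u7 _ haN
    have h7b := u7 _ hbN
    rw [hroot] at h7a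
    have hclseq : cls (a.1 * C + a.2) = cls (b.1 * C + b.2) := by
      have e1 := u5 _ haN _ h7a
      have e2 := u5 _ hbN _ h7b
      rw [← e1, ← e2]
    have hb_in : b.1 * C + b.2 ∈ cls (a.1 * C + a.2) := by
      rw [hclseq]
      exact u3 _ hbN
    have hreach : pvReach land R C a b := (hlink a hag b hbg).mp hb_in
    have hbk1 : b ∈ Cs.getD k1 ∅ := (c5 k1 hk1 a ha' b).mpr hreach
    have e3 := c3 k1 hk1 b hbk1
    have e4 := c3 k2 hk2 b hb'
    omega
  have hcol : ∀ j, 0 ≤ j → j < C →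
      ((colRootsB land R C n uf.1 j).map (fun rt => uf.2 rt)).sum
      = ((PySem.List.pyRange 0 R 1).foldl (colA stA.1 stA.2.1 j)
          ((fun _ => (0 : Int)), (0 : Int))).2 := by
    intro j hj0 hjC
    rw [colA_sum land R C stA.1 stA.2.1 Cs c2 c3 c4 c6 j]
    obtain ⟨hnodup, hmem⟩ := colRootsB_spec land R C n uf.1 j
    set ρ : ℕ → Int := fun k =>
      findRoot uf.1 n (((Cs.getD k ∅).toList.headD (0, 0)).1 * C
        + ((Cs.getD k ∅).toList.headD (0, 0)).2) with hρ
    have himg : (colRootsB land R C n uf.1 j).toFinset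
        = ((Finset.range Cs.length).filter
            (fun k => ∃ w ∈ Cs.getD k ∅, w.2 = j)).image ρ := by
      ext t
      rw [List.mem_toFinset, hmem t]
      constructor
      · rintro ⟨i, h0, h1, h2, h3⟩
        have hg : pvGood land R C (i, j) := ⟨h0, h1, hj0, hjC, h2⟩
        have hsep : stA.1 (i, j) ≠ -1 :=
          c7 (i, j) ((mem_pvGridList R C (i, j)).mpr ⟨h0, h1, hj0, hjC⟩) hg
        obtain ⟨k, hk, hmem'⟩ := (c2 (i, j)).mp hsep
        refine Finset.mem_image.mpr ⟨k, Finset.mem_filter.mpr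
          ⟨Finset.mem_range.mpr hk, ⟨(i, j), hmem', rfl⟩⟩, ?_⟩
        have hne : (Cs.getD k ∅).Nonempty := ⟨(i, j), hmem'⟩
        have hhd := headD_mem_finset _ hne
        rw [hρ]
        dsimp only
        rw [← h3]
        exact (hsameroot k hk ((Cs.getD k ∅).toList.headD (0, 0)) hhd (i, j) hmem').symm
      · intro ht
        obtain ⟨k, hkf, rfl⟩ := Finset.mem_image.mp ht
        obtain ⟨hkr, w, hw, hwj⟩ := Finset.mem_filter.mp hkf
        have hk : k < Cs.length := Finset.mem_range.mp hkr
        have hgw := hmemcls_k k hk w hw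
        have hne : (Cs.getD k ∅).Nonempty := ⟨w, hw⟩
        have hhd := headD_mem_finset _ hne
        refine ⟨w.1, hgw.1, hgw.2.1, ?_, ?_⟩
        · rw [← hwj]
          exact hgw.2.2.2.2
        · rw [hρ]
          dsimp only
          rw [← hwj]
          exact (hsameroot k hk ((Cs.getD k ∅).toList.headD (0, 0)) hhd w hw)
    have hinj : ∀ k1 ∈ (Finset.range Cs.length).filter
          (fun k => ∃ w ∈ Cs.getD k ∅, w.2 = j),
        ∀ k2 ∈ (Finset.range Cs.length).filter
          (fun k => ∃ w ∈ Cs.getD k ∅, w.2 = j), ρ k1 = ρ k2 → k1 = k2 := by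
      intro k1 hk1f k2 hk2f hrr
      obtain ⟨hkr1, w1, hw1, -⟩ := Finset.mem_filter.mp hk1f
      obtain ⟨hkr2, w2, hw2, -⟩ := Finset.mem_filter.mp hk2f
      have hk1 := Finset.mem_range.mp hkr1
      have hk2 := Finset.mem_range.mp hkr2
      have hhd1 := headD_mem_finset _ (⟨w1, hw1⟩ : (Cs.getD k1 ∅).Nonempty)
      have hhd2 := headD_mem_finset _ (⟨w2, hw2⟩ : (Cs.getD k2 ∅).Nonempty)
      exact hrootinj k1 hk1 _ hhd1 k2 hk2 _ hhd2 hrr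
    calc ((colRootsB land R C n uf.1 j).map (fun rt => uf.2 rt)).sum
        = (colRootsB land R C n uf.1 j).toFinset.sum (fun rt => uf.2 rt) :=
          (List.sum_toFinset _ hnodup).symm
      _ = ∑ k ∈ (Finset.range Cs.length).filter
            (fun k => ∃ w ∈ Cs.getD k ∅, w.2 = j), uf.2 (ρ k) := by
          rw [himg, Finset.sum_image hinj]
      _ = ∑ k ∈ (Finset.range Cs.length).filter
            (fun k => ∃ w ∈ Cs.getD k ∅, w.2 = j), ((Cs.getD k ∅).card : Int) := by
          refine Finset.sum_congr rfl ?_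
          intro k hkf
          obtain ⟨hkr, w, hw, -⟩ := Finset.mem_filter.mp hkf
          have hk := Finset.mem_range.mp hkr
          have hhd := headD_mem_finset _ (⟨w, hw⟩ : (Cs.getD k ∅).Nonempty)
          rw [hρ]
          dsimp only
          exact hsize k hk _ hhd
  refine PySem.List.foldl_congr_mem _ _ _ _ ?_
  intro acc j hjmem
  rw [PySem.List.mem_pyRange_one] at hjmem
  rw [(hcol j hjmem.1 hjmem.2).symm]
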